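-- pv_equiv track=rewrite | github.com/Nghia03092004/nghia03092004.github.io | project_euler_unified/problem_889/solution.py | pancake_bfs
-- ===== SOURCE A (Python) =====
-- from collections import deque
--
-- def prefix_reverse(perm, k):
--     """Reverse the first k elements of perm."""
--     return perm[:k][::-1] + perm[k:]
--
-- def pancake_bfs(n):
--     """BFS from identity to find distances of all permutations of S_n."""
--     identity = tuple(range(1, n + 1))
--     dist = {identity: 0}
--     queue = deque([identity])
--     while queue:
--         perm = queue.popleft()
--         d = dist[perm]
--         for k in range(2, n + 1):
--             new_perm = prefix_reverse(perm, k)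
--             if new_perm not in dist:
--                 dist[new_perm] = d + 1
--                 queue.append(new_perm)
--     return dist
-- ===== SOURCE B (Python) =====
-- def _deepen(perm, depth, limit, dist, n, expanded):
--     """Depth-limited DFS along shortest-path prefixes; record unseen perms at depth == limit.
--
--     An interior step descends to q only if q lies on a shortest path (dist[q] == depth+1)
--     and q's subtree was not already walked this round (the `expanded` set)."""
--     d1 = depth + 1
--     get = dist.get
--     if d1 == limit:
--         for k in range(2, n + 1):
--             q = perm[:k][::-1] + perm[k:]
--             if q not in dist:
--                 dist[q] = limit
--     else:
--         for k in range(2, n + 1):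
--             q = perm[:k][::-1] + perm[k:]
--             if get(q) == d1 and q not in expanded:
--                 expanded.add(q)
--                 _deepen(q, d1, limit, dist, n, expanded)
--
-- def pancake_bfs(n):
--     """Iterative deepening from identity: round `limit` records all perms at pancake
--     distance `limit`; stop once all len(identity)! permutations have been found."""
--     identity = tuple(range(1, n + 1))
--     dist = {identity: 0}
--     total = 1
--     for i in range(2, len(identity) + 1):
--         total *= i
--     limit = 1
--     while len(dist) < total:
--         _deepen(identity, 0, limit, dist, n, set())
--         limit += 1
--     return dist
-- ===== Notes on version B (the rewrite author's own statement) =====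
-- stated objective: alternative
-- what changed: Replaced the queue-based BFS by iterative deepening: rounds of depth-limited DFS from the identity walk only shortest-path prefixes (pruned by each interior node's stored distance and a per-round expanded set) and record unseen permutations at exactly the current depth limit, stopping once all n! permutations are found; no queue or frontier is kept and distances come from the deepening limit.
import Mathlib
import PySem

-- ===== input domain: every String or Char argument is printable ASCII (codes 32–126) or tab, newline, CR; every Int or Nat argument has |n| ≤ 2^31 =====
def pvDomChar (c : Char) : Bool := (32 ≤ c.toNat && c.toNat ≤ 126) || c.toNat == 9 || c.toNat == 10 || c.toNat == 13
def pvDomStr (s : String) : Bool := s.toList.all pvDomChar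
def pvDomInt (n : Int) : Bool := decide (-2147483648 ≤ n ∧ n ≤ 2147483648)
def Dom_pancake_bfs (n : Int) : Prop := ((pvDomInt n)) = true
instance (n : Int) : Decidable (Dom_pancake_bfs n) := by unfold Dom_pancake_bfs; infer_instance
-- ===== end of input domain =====

-- B replaces A's queue-based BFS by iterative deepening: rounds of depth-limited DFS along
-- shortest-path prefixes that record unseen permutations at the depth limit; alternative
-- algorithm (no queue), same result.

-- ===== PORT A =====

-- perm[:k][::-1] + perm[k:]  ([::-1] is reverse, exact: PySem.List.slice)
def prefix_reverse (perm : List Int) (k : Int) : List Int :=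
  (PySem.List.slice perm none (some k)).reverse ++ PySem.List.slice perm (some k) none

-- A's inner loop body: try one prefix reversal; if unseen, record it with value v and
-- append it to the queue
def pvInner (v : Int) (p : List Int)
    (s : PySem.Dict (List Int) Int × List (List Int)) (k : Int) :
    PySem.Dict (List Int) Int × List (List Int) :=
  if s.1.contains (prefix_reverse p k) then s
  else (s.1.insert (prefix_reverse p k) v, s.2 ++ [prefix_reverse p k])

-- A's while-loop: pop from the queue front, read d = dist[perm], expand k = 2..n.
-- fuel only makes the recursion total; it is chosen ≥ n! so it never runs out
-- (dist[perm] ported as get?/getD: KeyError is unreachable, queue elements are dist keys).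
def pancake_bfs_loop (n : Int) :
    Nat → PySem.Dict (List Int) Int → List (List Int) → PySem.Dict (List Int) Int
  | 0, dist, _ => dist
  | _ + 1, dist, [] => dist
  | fuel + 1, dist, p :: qs =>
    let d := (dist.get? p).getD 0
    let s := (PySem.List.pyRange 2 (n + 1) 1).foldl (pvInner (d + 1) p) (dist, qs)
    pancake_bfs_loop n fuel s.1 s.2

def pancake_bfs (n : Int) : List (List Int × Int) :=
  let identity := PySem.List.pyRange 1 (n + 1) 1
  (pancake_bfs_loop n (Nat.factorial n.toNat)
      (PySem.Dict.empty.insert identity 0) [identity]).items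

-- ===== PORT B =====

-- B's depth-limited DFS _deepen on the state (dist, expanded): walk only shortest-path
-- prefixes (interior step to q only when dist.get(q) == depth+1 and q was not walked
-- this round) and record unseen permutations at depth == limit.
-- fuel = limit - depth only makes the recursion total; reachable calls keep it positive.
def pvDeepen (n limit : Int) :
    Nat → Int → List Int →
      PySem.Dict (List Int) Int × PySem.Set (List Int) →
      PySem.Dict (List Int) Int × PySem.Set (List Int)
  | 0, _, _, s => s
  | r + 1, depth, perm, s =>
    if depth + 1 = limit then
      ((PySem.List.pyRange 2 (n + 1) 1).foldl (fun dist k =>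
        let q := prefix_reverse perm k
        if dist.contains q then dist else dist.insert q limit) s.1, s.2)
    else
      (PySem.List.pyRange 2 (n + 1) 1).foldl (fun s k =>
        let q := prefix_reverse perm k
        if s.1.get? q = some (depth + 1) ∧ q ∉ s.2 then
          pvDeepen n limit r (depth + 1) q (s.1, PySem.Set.add s.2 q)
        else s) s

-- B's outer loop: deepen round by round (fresh expanded set each round) until all
-- `total` = len(identity)! permutations are found.
-- fuel ≥ n! + 1 bounds the number of rounds; it never runs out.
def pvAltLoop (n : Int) (identity : List Int) (total : Int) :
    Nat → Int → PySem.Dict (List Int) Int → PySem.Dict (List Int) Int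
  | 0, _, dist => dist
  | f + 1, limit, dist =>
    if (dist.size : Int) < total then
      pvAltLoop n identity total f (limit + 1)
        (pvDeepen n limit limit.toNat 0 identity (dist, PySem.Set.empty)).1
    else dist

def pancake_bfs_alt (n : Int) : List (List Int × Int) :=
  let identity := PySem.List.pyRange 1 (n + 1) 1
  let total := (PySem.List.pyRange 2 ((identity.length : Int) + 1) 1).foldl (fun t i => t * i) (1 : Int)
  (pvAltLoop n identity total (Nat.factorial n.toNat + 1) 1
      (PySem.Dict.empty.insert identity 0)).items

-- ===== PRECONDITION & SPEC =====
def Spec_pancake_bfs (n : Int) (out : List (List Int × Int)) : Prop := out = pancake_bfs_alt n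
instance (n : Int) (out : List (List Int × Int)) : Decidable (Spec_pancake_bfs n out) := by unfold Spec_pancake_bfs; infer_instance

-- ===== CLAIM (what is proved, stated in full; the proofs are below) =====
def Claim_equal_pancake_bfs : Prop := ∀ (n : Int), Dom_pancake_bfs n → Spec_pancake_bfs n (pancake_bfs n)

-- ===== LEMMAS AND PROOFS =====

-- ---- proof-layer definitions: a level-synchronous intermediate between the two ports ----

-- one whole BFS level, expanded parent by parent with A's inner body
def levelFold (n v : Int) (ps : List (List Int))
    (s : PySem.Dict (List Int) Int × List (List Int)) :
    PySem.Dict (List Int) Int × List (List Int) :=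
  ps.foldl (fun s p => (PySem.List.pyRange 2 (n + 1) 1).foldl (pvInner v p) s) s

-- the level-synchronous loop (intermediate between A's queue and B's deepening)
def levelLoop (n : Int) :
    Nat → PySem.Dict (List Int) Int → List (List Int) → Int → PySem.Dict (List Int) Int
  | 0, dist, _, _ => dist
  | _ + 1, dist, [], _ => dist
  | fuel + 1, dist, q :: qs, level =>
    let s := levelFold n (level + 1) (q :: qs) (dist, [])
    levelLoop n fuel s.1 s.2 (level + 1)

def identL (n : Int) : List Int := PySem.List.pyRange 1 (n + 1) 1

-- the pure history of BFS states: (dict after levels ≤ j, level-j frontier in BFS order)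
def DF (n : Int) : Nat → PySem.Dict (List Int) Int × List (List Int)
  | 0 => (PySem.Dict.empty.insert (identL n) 0, [identL n])
  | j + 1 => levelFold n ((j : Int) + 1) (DF n j).2 ((DF n j).1, [])

-- dict invariant: keys are distinct permutations of the identity
def DGood (ident : List Int) (d : PySem.Dict (List Int) Int) : Prop :=
  d.keys.Nodup ∧ ∀ q ∈ d.keys, q.Perm ident

-- dict-only step / parent expansion (B's leaf-level work, value v)
def leafStep (v : Int) (p : List Int) (d : PySem.Dict (List Int) Int) (k : Int) :
    PySem.Dict (List Int) Int :=
  if d.contains (prefix_reverse p k) then d else d.insert (prefix_reverse p k) v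

def expandLeaf (n v : Int) (d : PySem.Dict (List Int) Int) (p : List Int) :
    PySem.Dict (List Int) Int :=
  (PySem.List.pyRange 2 (n + 1) 1).foldl (leafStep v p) d

-- children of u that are NOT yet in dict d (discovery candidates), in k order
def chN (n : Int) (d : PySem.Dict (List Int) Int) (u : List Int) : List (List Int) :=
  (PySem.List.pyRange 2 (n + 1) 1).filterMap
    (fun k => if d.contains (prefix_reverse u k) then none else some (prefix_reverse u k))

-- children of u lying on the next BFS level Fi, in k order
def chF (n : Int) (Fi : List (List Int)) (u : List Int) : List (List Int) :=
  (PySem.List.pyRange 2 (n + 1) 1).filterMap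
    (fun k => if prefix_reverse u k ∈ Fi then some (prefix_reverse u k) else none)

-- all geodesic walks from u at depth `depth`, r more steps: the list of their endpoints
-- in DFS (path-lexicographic) order, with one copy per walk
def walk (n : Int) : Nat → Nat → List Int → List (List Int)
  | 0, _, u => [u]
  | r + 1, depth, u => (chF n (DF n (depth + 1)).2 u).flatMap (walk n r (depth + 1))

-- first-occurrence deduplication (elements of `seen` dropped)
def dfirstAux {α : Type} [DecidableEq α] (seen : List α) : List α → List α
  | [] => []
  | x :: xs => if x ∈ seen then dfirstAux seen xs else x :: dfirstAux (x :: seen) xs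

-- the dict of DF n j holds value w at q iff q was discovered on level w ≤ j
def HistP (n : Int) (j : Nat) : Prop :=
  ∀ q w, (DF n j).1.get? q = some w ↔ ∃ i, i ≤ j ∧ ((i : Nat) : Int) = w ∧ q ∈ (DF n i).2

-- what B's interior pruning needs: values 1..j in s pick out exactly the BFS levels
def Compat (n : Int) (j : Nat) (s : PySem.Dict (List Int) Int) : Prop :=
  ∀ q (i : Nat), 1 ≤ i → i ≤ j → (s.get? q = some ((i : Nat) : Int) ↔ q ∈ (DF n i).2)

-- ---- basic facts about prefix_reverse and A's loop (shared machinery) ----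

theorem slice_split (xs : List Int) (k : Int) :
    PySem.List.slice xs none (some k) ++ PySem.List.slice xs (some k) none = xs := by
  by_cases hk : 0 ≤ k
  · rw [PySem.List.slice_to _ hk, PySem.List.slice_from _ hk, List.take_append_drop]
  · have hm : 0 < (-k).toNat := by omega
    have hk' : k = -(((-k).toNat : Nat) : Int) := by omega
    rw [hk', PySem.List.slice_to_neg_natCast _ _ hm, PySem.List.slice_from_neg_natCast _ _ hm,
      List.take_append_drop]

theorem prefix_reverse_perm (p : List Int) (k : Int) : (prefix_reverse p k).Perm p := by
  unfold prefix_reverse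
  have h1 : ((PySem.List.slice p none (some k)).reverse ++ PySem.List.slice p (some k) none).Perm
      (PySem.List.slice p none (some k) ++ PySem.List.slice p (some k) none) :=
    (List.reverse_perm _).append_right _
  rw [slice_split p k] at h1
  exact h1

theorem loopA_nil (n : Int) (f : Nat) (dist : PySem.Dict (List Int) Int) :
    pancake_bfs_loop n f dist [] = dist := by
  cases f <;> rfl

theorem loopA_cons (n : Int) (f : Nat) (dist : PySem.Dict (List Int) Int)
    (p : List Int) (qs : List (List Int)) :
    pancake_bfs_loop n (f + 1) dist (p :: qs) =
      pancake_bfs_loop n f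
        ((PySem.List.pyRange 2 (n + 1) 1).foldl (pvInner ((dist.get? p).getD 0 + 1) p) (dist, qs)).1
        ((PySem.List.pyRange 2 (n + 1) 1).foldl (pvInner ((dist.get? p).getD 0 + 1) p) (dist, qs)).2 := rfl

theorem loopB_nil (n : Int) (f : Nat) (dist : PySem.Dict (List Int) Int) (L : Int) :
    levelLoop n f dist [] L = dist := by
  cases f <;> rfl

theorem loopB_cons (n : Int) (f : Nat) (dist : PySem.Dict (List Int) Int)
    (q : List Int) (qs : List (List Int)) (L : Int) :
    levelLoop n (f + 1) dist (q :: qs) L =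
      levelLoop n f (levelFold n (L + 1) (q :: qs) (dist, [])).1
        (levelFold n (L + 1) (q :: qs) (dist, [])).2 (L + 1) := rfl

-- the inner fold only appends to the list component; a prefix passes through
theorem inner_shift (v : Int) (p : List Int) (ks : List Int) :
    ∀ (dist : PySem.Dict (List Int) Int) (pre acc : List (List Int)),
    ks.foldl (pvInner v p) (dist, pre ++ acc) =
      ((ks.foldl (pvInner v p) (dist, acc)).1,
        pre ++ (ks.foldl (pvInner v p) (dist, acc)).2) := by
  induction ks with
  | nil => intro dist pre acc; rfl
  | cons k ks ih =>
    intro dist pre acc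
    simp only [List.foldl_cons, pvInner]
    by_cases hc : dist.contains (prefix_reverse p k) = true
    · rw [if_pos hc, if_pos hc]; exact ih dist pre acc
    · rw [if_neg hc, if_neg hc, List.append_assoc]
      exact ih (dist.insert (prefix_reverse p k) v) pre (acc ++ [prefix_reverse p k])

-- existing bindings survive the inner fold
theorem inner_mono (v : Int) (p : List Int) (ks : List Int) :
    ∀ (s : PySem.Dict (List Int) Int × List (List Int)) (q : List Int) (w : Int),
    s.1.get? q = some w → (ks.foldl (pvInner v p) s).1.get? q = some w := by
  induction ks with
  | nil => intro s q w h; exact h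
  | cons k ks ih =>
    intro s q w h
    simp only [List.foldl_cons]
    apply ih
    by_cases hc : s.1.contains (prefix_reverse p k) = true
    · simp only [pvInner, if_pos hc]; exact h
    · simp only [pvInner, if_neg hc]
      have hnone : s.1.get? (prefix_reverse p k) = none :=
        (PySem.Dict.get?_eq_none_iff_contains s.1 _).2 (by simpa using hc)
      have hne : q ≠ prefix_reverse p k := by
        intro he; rw [he, hnone] at h; simp at h
      rw [PySem.Dict.get?_insert_of_ne _ _ hne]
      exact h

-- invariants through the inner fold: DGood, all appended nodes bound to v, size accounting
theorem inner_inv (ident : List Int) (v : Int) (p : List Int) (hp : p.Perm ident)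
    (ks : List Int) :
    ∀ (s : PySem.Dict (List Int) Int × List (List Int)),
    DGood ident s.1 → (∀ q ∈ s.2, s.1.get? q = some v) →
    DGood ident (ks.foldl (pvInner v p) s).1 ∧
      (∀ q ∈ (ks.foldl (pvInner v p) s).2, (ks.foldl (pvInner v p) s).1.get? q = some v) ∧
      (ks.foldl (pvInner v p) s).1.size + s.2.length =
        s.1.size + (ks.foldl (pvInner v p) s).2.length := by
  induction ks with
  | nil => intro s hg hacc; exact ⟨hg, hacc, rfl⟩
  | cons k ks ih =>
    intro s hg hacc
    simp only [List.foldl_cons]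
    by_cases hc : s.1.contains (prefix_reverse p k) = true
    · simp only [pvInner, if_pos hc]; exact ih s hg hacc
    · simp only [pvInner, if_neg hc]
      have hcf : s.1.contains (prefix_reverse p k) = false := by simpa using hc
      have hnp : prefix_reverse p k ∉ s.1.keys := by
        intro hm
        rw [(PySem.Dict.contains_iff_mem_keys s.1 _).2 hm] at hcf
        exact Bool.noConfusion hcf
      have hkeys : (s.1.insert (prefix_reverse p k) v).keys = s.1.keys ++ [prefix_reverse p k] :=
        PySem.Dict.keys_insert_of_not_contains s.1 v hcf
      have hg' : DGood ident (s.1.insert (prefix_reverse p k) v) := by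
        constructor
        · rw [hkeys]
          exact List.Nodup.append hg.1 (List.nodup_singleton _)
            (by intro a ha hb; simp at hb; subst hb; exact hnp ha)
        · intro q hq
          rw [hkeys] at hq
          rcases List.mem_append.1 hq with hq | hq
          · exact hg.2 q hq
          · simp at hq; subst hq; exact (prefix_reverse_perm p k).trans hp
      have hacc' : ∀ q ∈ s.2 ++ [prefix_reverse p k],
          (s.1.insert (prefix_reverse p k) v).get? q = some v := by
        intro q hq
        rcases List.mem_append.1 hq with hq | hq
        · have hqmem : q ∈ s.1.keys := by
            by_contra hn
            have := (PySem.Dict.get?_eq_none_iff_not_mem_keys s.1 q).2 hn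
            rw [hacc q hq] at this
            simp at this
          have hne : q ≠ prefix_reverse p k := by
            intro he; exact hnp (he ▸ hqmem)
          rw [PySem.Dict.get?_insert_of_ne _ _ hne]; exact hacc q hq
        · simp at hq; subst hq; exact PySem.Dict.get?_insert_self _ _ _
      obtain ⟨g, a, sz⟩ :=
        ih (s.1.insert (prefix_reverse p k) v, s.2 ++ [prefix_reverse p k]) hg' hacc'
      refine ⟨g, a, ?_⟩
      have hsz : (s.1.insert (prefix_reverse p k) v).size = s.1.size + 1 := by
        rw [PySem.Dict.size_insert, hcf]; simp
      simp only [List.length_append, List.length_singleton, hsz] at sz ⊢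
      omega

-- invariants through one whole level
theorem outer_inv (ident : List Int) (n L : Int) (ps : List (List Int)) :
    ∀ (s : PySem.Dict (List Int) Int × List (List Int)),
    (∀ p ∈ ps, s.1.get? p = some L) → DGood ident s.1 →
    (∀ q ∈ s.2, s.1.get? q = some (L + 1)) →
    DGood ident (levelFold n (L + 1) ps s).1 ∧
      (∀ q ∈ (levelFold n (L + 1) ps s).2,
        (levelFold n (L + 1) ps s).1.get? q = some (L + 1)) ∧
      (levelFold n (L + 1) ps s).1.size + s.2.length =
        s.1.size + (levelFold n (L + 1) ps s).2.length := by
  induction ps with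
  | nil => intro s _ hg hacc; exact ⟨hg, hacc, rfl⟩
  | cons p ps ih =>
    intro s hps hg hacc
    have hpmem : p ∈ s.1.keys := by
      by_contra hn
      have := (PySem.Dict.get?_eq_none_iff_not_mem_keys s.1 p).2 hn
      rw [hps p (by simp)] at this
      simp at this
    have hp : p.Perm ident := hg.2 p hpmem
    obtain ⟨g1, a1, sz1⟩ :=
      inner_inv ident (L + 1) p hp (PySem.List.pyRange 2 (n + 1) 1) s hg hacc
    have hps' : ∀ q ∈ ps,
        ((PySem.List.pyRange 2 (n + 1) 1).foldl (pvInner (L + 1) p) s).1.get? q = some L := by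
      intro q hq
      exact inner_mono (L + 1) p _ s q L (hps q (by simp [hq]))
    obtain ⟨g2, a2, sz2⟩ :=
      ih ((PySem.List.pyRange 2 (n + 1) 1).foldl (pvInner (L + 1) p) s) hps' g1 a1
    have hconv : levelFold n (L + 1) (p :: ps) s =
        levelFold n (L + 1) ps ((PySem.List.pyRange 2 (n + 1) 1).foldl (pvInner (L + 1) p) s) := rfl
    rw [hconv]
    exact ⟨g2, a2, by omega⟩

-- A executes one whole level: |cur| pops turn queue cur ++ nxt into the levelFold state
theorem level_exec (n : Int) (L : Int) (cur : List (List Int)) :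
    ∀ (dist : PySem.Dict (List Int) Int) (nxt : List (List Int)) (f : Nat),
    (∀ p ∈ cur, dist.get? p = some L) →
    pancake_bfs_loop n (f + cur.length) dist (cur ++ nxt) =
      pancake_bfs_loop n f (levelFold n (L + 1) cur (dist, nxt)).1
        (levelFold n (L + 1) cur (dist, nxt)).2 := by
  induction cur with
  | nil => intro dist nxt f _; rfl
  | cons p cs ih =>
    intro dist nxt f hcur
    have hlen : f + (p :: cs).length = (f + cs.length) + 1 := by
      simp only [List.length_cons]; omega
    rw [hlen, List.cons_append, loopA_cons]
    have hd : (dist.get? p).getD 0 = L := by rw [hcur p (by simp)]; rfl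
    rw [hd, inner_shift]
    have hcs : ∀ q ∈ cs,
        ((PySem.List.pyRange 2 (n + 1) 1).foldl (pvInner (L + 1) p) (dist, nxt)).1.get? q = some L := by
      intro q hq
      exact inner_mono (L + 1) p _ (dist, nxt) q L (hcur q (by simp [hq]))
    rw [ih _ _ f hcs]
    rfl

theorem size_le_bound (ident : List Int) (d : PySem.Dict (List Int) Int)
    (hg : DGood ident d) : d.size ≤ Nat.factorial ident.length := by
  have hsub : d.keys ⊆ ident.permutations := by
    intro q hq
    exact List.mem_permutations.2 (hg.2 q hq)
  have hle : d.keys.length ≤ ident.permutations.length :=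
    (hg.1.subperm hsub).length_le
  rw [List.length_permutations] at hle
  have hk : d.keys.length = d.size := by
    simp [PySem.Dict.keys, PySem.Dict.size]
  omega

-- the simulation: queue BFS (A) = level-synchronous BFS, given enough fuel
theorem sim (n : Int) (ident : List Int) :
    ∀ (fb fa : Nat) (dist : PySem.Dict (List Int) Int) (cur : List (List Int)) (L : Int),
    (∀ p ∈ cur, dist.get? p = some L) → DGood ident dist →
    cur.length + (Nat.factorial ident.length - dist.size) ≤ fa →
    cur.length + (Nat.factorial ident.length - dist.size) ≤ fb →
    pancake_bfs_loop n fa dist cur = levelLoop n fb dist cur L := by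
  intro fb
  induction fb with
  | zero =>
    intro fa dist cur L _ _ _ hfb
    cases cur with
    | nil => rw [loopA_nil]; rfl
    | cons q qs => exact absurd hfb (by simp only [List.length_cons]; omega)
  | succ fb ih =>
    intro fa dist cur L hcur hg hfa hfb
    cases cur with
    | nil => rw [loopA_nil]; rfl
    | cons q qs =>
      rw [loopB_cons]
      obtain ⟨g, a, sz⟩ := outer_inv ident n L (q :: qs) (dist, []) hcur hg
        (by intro x hx; exact absurd hx (List.not_mem_nil))
      have hbound : (levelFold n (L + 1) (q :: qs) (dist, [])).1.size ≤
          Nat.factorial ident.length := size_le_bound ident _ g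
      have hlen : (q :: qs).length ≤ fa := le_trans (Nat.le_add_right _ _) hfa
      have hfa' : fa = (fa - (q :: qs).length) + (q :: qs).length := by omega
      conv_lhs => rw [← List.append_nil (q :: qs)]
      rw [hfa', level_exec n L (q :: qs) dist [] _ hcur]
      apply ih
      · exact a
      · exact g
      · simp only [List.length_nil] at sz
        simp only [List.length_cons] at hfa ⊢
        omega
      · simp only [List.length_nil] at sz
        simp only [List.length_cons] at hfb ⊢
        omega

theorem init_bind (ident : List Int) :
    ∀ p ∈ [ident], (PySem.Dict.empty.insert ident (0 : Int)).get? p = some 0 := by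
  intro p hp
  simp only [List.mem_singleton] at hp
  subst hp
  exact PySem.Dict.get?_insert_self _ _ _

theorem init_good (ident : List Int) :
    DGood ident (PySem.Dict.empty.insert ident (0 : Int)) := by
  have hkeys : (PySem.Dict.empty.insert ident (0 : Int)).keys = [ident] := by
    rw [PySem.Dict.keys_insert_of_not_contains _ _ (PySem.Dict.contains_empty _)]
    simp [PySem.Dict.keys_empty]
  constructor
  · rw [hkeys]; exact List.nodup_singleton _
  · intro q hq; rw [hkeys] at hq; simp at hq; subst hq; exact List.Perm.refl _

theorem init_fuel (n : Int) :
    [PySem.List.pyRange 1 (n + 1) 1].length +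
      (Nat.factorial (PySem.List.pyRange 1 (n + 1) 1).length -
        (PySem.Dict.empty.insert (PySem.List.pyRange 1 (n + 1) 1) (0 : Int)).size) ≤
      Nat.factorial n.toNat := by
  have hsize : (PySem.Dict.empty.insert (PySem.List.pyRange 1 (n + 1) 1) (0 : Int)).size = 1 := by
    rw [PySem.Dict.size_insert, PySem.Dict.contains_empty]
    simp [PySem.Dict.size_empty]
  have hlen : (PySem.List.pyRange 1 (n + 1) 1).length = n.toNat := by
    rw [PySem.List.length_pyRange_one]; omega
  have hpos := Nat.factorial_pos n.toNat
  rw [hsize, hlen]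
  simp only [List.length_singleton]
  omega

-- ---- new machinery: the deepening rounds compute exactly the BFS levels ----

theorem inner_ext (v : Int) (p : List Int) (ks : List Int)
    (d : PySem.Dict (List Int) Int) (acc : List (List Int)) :
    ks.foldl (pvInner v p) (d, acc) =
      ((ks.foldl (pvInner v p) (d, [])).1, acc ++ (ks.foldl (pvInner v p) (d, [])).2) := by
  have h := inner_shift v p ks d acc []
  rwa [List.append_nil] at h

theorem level_ext (n v : Int) (P : List (List Int)) :
    ∀ (d : PySem.Dict (List Int) Int) (acc : List (List Int)),
    levelFold n v P (d, acc) =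
      ((levelFold n v P (d, [])).1, acc ++ (levelFold n v P (d, [])).2) := by
  induction P with
  | nil => intro d acc; simp [levelFold]
  | cons p P ih =>
    intro d acc
    show levelFold n v P ((PySem.List.pyRange 2 (n + 1) 1).foldl (pvInner v p) (d, acc)) =
      ((levelFold n v P ((PySem.List.pyRange 2 (n + 1) 1).foldl (pvInner v p) (d, []))).1,
        acc ++ (levelFold n v P ((PySem.List.pyRange 2 (n + 1) 1).foldl (pvInner v p) (d, []))).2)
    rw [inner_ext v p _ d acc, ih _ _]
    conv_rhs => rw [show (PySem.List.pyRange 2 (n + 1) 1).foldl (pvInner v p) (d, ([] : List (List Int))) =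
      (((PySem.List.pyRange 2 (n + 1) 1).foldl (pvInner v p) (d, ([] : List (List Int)))).1,
        ((PySem.List.pyRange 2 (n + 1) 1).foldl (pvInner v p) (d, ([] : List (List Int)))).2) from rfl,
      ih _ _]
    simp [List.append_assoc]

theorem proj_inner (v : Int) (p : List Int) (ks : List Int) :
    ∀ (s : PySem.Dict (List Int) Int × List (List Int)),
    (ks.foldl (pvInner v p) s).1 = ks.foldl (leafStep v p) s.1 := by
  induction ks with
  | nil => intro s; rfl
  | cons k ks ih =>
    intro s
    simp only [List.foldl_cons, pvInner, leafStep]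
    by_cases hc : s.1.contains (prefix_reverse p k) = true
    · rw [if_pos hc, if_pos hc]; exact ih s
    · rw [if_neg hc, if_neg hc]
      exact ih (s.1.insert (prefix_reverse p k) v, s.2 ++ [prefix_reverse p k])

theorem proj_level (n v : Int) (P : List (List Int)) :
    ∀ (s : PySem.Dict (List Int) Int × List (List Int)),
    (levelFold n v P s).1 = P.foldl (expandLeaf n v) s.1 := by
  induction P with
  | nil => intro s; rfl
  | cons p P ih =>
    intro s
    show (levelFold n v P ((PySem.List.pyRange 2 (n+1) 1).foldl (pvInner v p) s)).1 = _
    rw [ih _, proj_inner]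
    rfl

-- ---- dfirstAux ----

theorem dfirstAux_congr {α : Type} [DecidableEq α] :
    ∀ (l s1 s2 : List α), (∀ x, x ∈ s1 ↔ x ∈ s2) → dfirstAux s1 l = dfirstAux s2 l := by
  intro l
  induction l with
  | nil => intro s1 s2 h; rfl
  | cons x xs ih =>
    intro s1 s2 h
    simp only [dfirstAux]
    by_cases hx : x ∈ s1
    · rw [if_pos hx, if_pos ((h x).1 hx)]; exact ih s1 s2 h
    · rw [if_neg hx, if_neg (fun hc => hx ((h x).2 hc))]
      exact congrArg (x :: ·) (ih (x :: s1) (x :: s2) (by intro y; simp [h y]))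

theorem mem_dfirstAux {α : Type} [DecidableEq α] :
    ∀ (l seen : List α) (x : α), x ∈ dfirstAux seen l ↔ (x ∈ l ∧ x ∉ seen) := by
  intro l
  induction l with
  | nil => intro seen x; simp [dfirstAux]
  | cons a l ih =>
    intro seen x
    simp only [dfirstAux]
    by_cases ha : a ∈ seen
    · rw [if_pos ha]
      rw [ih seen x]
      simp only [List.mem_cons]
      constructor
      · rintro ⟨h1, h2⟩; exact ⟨Or.inr h1, h2⟩
      · rintro ⟨h1 | h1, h2⟩
        · exact absurd (h1 ▸ ha) h2
        · exact ⟨h1, h2⟩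
    · rw [if_neg ha]
      simp only [List.mem_cons, ih (a :: seen) x, List.mem_cons]
      constructor
      · rintro (rfl | ⟨h1, h2⟩)
        · exact ⟨Or.inl rfl, ha⟩
        · exact ⟨Or.inr h1, fun hc => h2 (Or.inr hc)⟩
      · rintro ⟨rfl | h1, h2⟩
        · exact Or.inl rfl
        · by_cases hxa : x = a
          · exact Or.inl hxa
          · exact Or.inr ⟨h1, fun hc => (hc.elim hxa h2)⟩

theorem dfirstAux_nil_of_sub {α : Type} [DecidableEq α] :
    ∀ (A seen : List α), (∀ x ∈ A, x ∈ seen) → dfirstAux seen A = [] := by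
  intro A
  induction A with
  | nil => intro seen h; rfl
  | cons a A ih =>
    intro seen h
    simp only [dfirstAux, if_pos (h a (by simp))]
    exact ih seen (fun x hx => h x (by simp [hx]))

theorem dfirstAux_append {α : Type} [DecidableEq α] (B : List α) :
    ∀ (A seen : List α), dfirstAux seen (A ++ B) = dfirstAux seen A ++ dfirstAux (A ++ seen) B := by
  intro A
  induction A with
  | nil => intro seen; simp [dfirstAux]
  | cons a A ih =>
    intro seen
    simp only [List.cons_append, dfirstAux]
    by_cases ha : a ∈ seen
    · rw [if_pos ha, if_pos ha, ih seen]
      refine congrArg _ (dfirstAux_congr _ _ _ ?_)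
      intro x; simp only [List.mem_append, List.mem_cons]
      constructor
      · rintro (h | h); exacts [Or.inr (Or.inl h), Or.inr (Or.inr h)]
      · rintro (rfl | h | h); exacts [Or.inr ha, Or.inl h, Or.inr h]
    · rw [if_neg ha, if_neg ha, ih (a :: seen), List.cons_append]
      refine congrArg _ (congrArg _ (dfirstAux_congr _ _ _ ?_))
      intro x; simp only [List.mem_append, List.mem_cons]; tauto

-- deduplicating the parents first does not change first-occurrence dedup of all children
theorem dfirst_flatMap {α : Type} [DecidableEq α] (ch : α → List α) :
    ∀ (V Sp Sc : List α), (∀ u ∈ Sp, ∀ c ∈ ch u, c ∈ Sc) →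
    dfirstAux Sc (V.flatMap ch) = dfirstAux Sc ((dfirstAux Sp V).flatMap ch) := by
  intro V
  induction V with
  | nil => intro Sp Sc h; rfl
  | cons u V ih =>
    intro Sp Sc h
    simp only [List.flatMap_cons, dfirstAux]
    by_cases hu : u ∈ Sp
    · rw [if_pos hu]
      rw [dfirstAux_append, dfirstAux_nil_of_sub _ _ (fun c hc => h u hu c hc), List.nil_append]
      rw [dfirstAux_congr (V.flatMap ch) _ Sc
        (by intro x; simp only [List.mem_append]
            constructor
            · rintro (hx | hx); exacts [h u hu x hx, hx]
            · exact Or.inr)]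
      exact ih Sp Sc h
    · rw [if_neg hu]
      simp only [List.flatMap_cons]
      rw [dfirstAux_append, dfirstAux_append]
      refine congrArg _ ?_
      exact ih (u :: Sp) (ch u ++ Sc) (by
        intro w hw c hc
        rcases List.mem_cons.1 hw with rfl | hw
        · exact List.mem_append.2 (Or.inl hc)
        · exact List.mem_append.2 (Or.inr (h w hw c hc)))

-- ---- what one level appends: first occurrences of fresh children ----

theorem inner_disc (v : Int) (p : List Int) (D0 : PySem.Dict (List Int) Int) :
    ∀ (ks : List Int) (s : PySem.Dict (List Int) Int × List (List Int)),
    (∀ x, s.1.contains x = true ↔ (D0.contains x = true ∨ x ∈ s.2)) →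
    (ks.foldl (pvInner v p) s).2 = s.2 ++ dfirstAux s.2
        (ks.filterMap (fun k =>
          if D0.contains (prefix_reverse p k) then none else some (prefix_reverse p k))) ∧
      (∀ x, (ks.foldl (pvInner v p) s).1.contains x = true ↔
        (D0.contains x = true ∨ x ∈ (ks.foldl (pvInner v p) s).2)) := by
  intro ks
  induction ks with
  | nil => intro s hinv; exact ⟨by simp [dfirstAux], hinv⟩
  | cons k ks ih =>
    intro s hinv
    by_cases hD : D0.contains (prefix_reverse p k) = true
    · have hc : s.1.contains (prefix_reverse p k) = true := (hinv _).2 (Or.inl hD)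
      rw [List.filterMap_cons_none (by simp [hD])]
      simp only [List.foldl_cons]
      rw [show pvInner v p s k = s from by simp [pvInner, hc]]
      exact ih s hinv
    · have hDf : D0.contains (prefix_reverse p k) = false := by simpa using hD
      have hfm : List.filterMap
            (fun k' => if D0.contains (prefix_reverse p k') = true then none
              else some (prefix_reverse p k')) (k :: ks) =
          prefix_reverse p k :: List.filterMap
            (fun k' => if D0.contains (prefix_reverse p k') = true then none
              else some (prefix_reverse p k')) ks := by
        simp [List.filterMap_cons, hDf]
      rw [hfm]
      by_cases hq : prefix_reverse p k ∈ s.2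
      · have hc : s.1.contains (prefix_reverse p k) = true := (hinv _).2 (Or.inr hq)
        simp only [List.foldl_cons]
        rw [show pvInner v p s k = s from by simp [pvInner, hc]]
        obtain ⟨h1, h2⟩ := ih s hinv
        refine ⟨?_, h2⟩
        rw [h1]
        simp only [dfirstAux, if_pos hq]
      · have hc : s.1.contains (prefix_reverse p k) = false := by
          cases hct : s.1.contains (prefix_reverse p k) with
          | false => rfl
          | true =>
            rcases (hinv _).1 hct with h | h
            · rw [h] at hDf; exact Bool.noConfusion hDf
            · exact absurd h hq
        simp only [List.foldl_cons]
        rw [show pvInner v p s k = (s.1.insert (prefix_reverse p k) v, s.2 ++ [prefix_reverse p k])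
          from by simp [pvInner, hc]]
        have hinv' : ∀ x, (s.1.insert (prefix_reverse p k) v, s.2 ++ [prefix_reverse p k]).1.contains x = true ↔
            (D0.contains x = true ∨ x ∈ (s.1.insert (prefix_reverse p k) v, s.2 ++ [prefix_reverse p k]).2) := by
          intro x
          show (s.1.insert (prefix_reverse p k) v).contains x = true ↔ _
          rw [PySem.Dict.contains_insert]
          simp only [Bool.or_eq_true, beq_iff_eq, hinv x, List.mem_append, List.mem_singleton]
          tauto
        obtain ⟨h1, h2⟩ := ih _ hinv'
        refine ⟨?_, h2⟩
        rw [h1]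
        show (s.2 ++ [prefix_reverse p k]) ++ _ = _
        simp only [dfirstAux, if_neg hq]
        rw [List.append_assoc]
        refine congrArg _ ?_
        simp only [List.singleton_append, List.cons_append, List.nil_append]
        refine congrArg _ (dfirstAux_congr _ _ _ ?_)
        intro x
        simp only [List.mem_append, List.mem_singleton, List.mem_cons]
        tauto

theorem level_disc (n v : Int) (D0 : PySem.Dict (List Int) Int) :
    ∀ (P : List (List Int)) (s : PySem.Dict (List Int) Int × List (List Int)),
    (∀ x, s.1.contains x = true ↔ (D0.contains x = true ∨ x ∈ s.2)) →
    (levelFold n v P s).2 = s.2 ++ dfirstAux s.2 (P.flatMap (chN n D0)) ∧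
      (∀ x, (levelFold n v P s).1.contains x = true ↔
        (D0.contains x = true ∨ x ∈ (levelFold n v P s).2)) := by
  intro P
  induction P with
  | nil => intro s hinv; exact ⟨by simp [levelFold, dfirstAux], hinv⟩
  | cons u P ih =>
    intro s hinv
    obtain ⟨h1, h2⟩ := inner_disc v u D0 (PySem.List.pyRange 2 (n + 1) 1) s hinv
    have hconv : levelFold n v (u :: P) s =
        levelFold n v P ((PySem.List.pyRange 2 (n + 1) 1).foldl (pvInner v u) s) := rfl
    obtain ⟨g1, g2⟩ := ih _ h2
    rw [hconv]
    refine ⟨?_, g2⟩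
    rw [g1, h1]
    simp only [List.flatMap_cons]
    rw [dfirstAux_append]
    show _ = s.2 ++ (dfirstAux s.2 (chN n D0 u) ++ _)
    rw [List.append_assoc]
    refine congrArg _ (congrArg _ ?_)
    refine dfirstAux_congr _ _ _ ?_
    intro x
    simp only [List.mem_append, mem_dfirstAux, chN]
    tauto

-- ---- value characterization of one level (for HistP) ----

theorem inner_char (v : Int) (p : List Int) :
    ∀ (ks : List Int) (s : PySem.Dict (List Int) Int × List (List Int)),
    (∀ x ∈ s.2, s.1.contains x = true) →
    (∀ q w, (ks.foldl (pvInner v p) s).1.get? q = some w ↔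
        (s.1.get? q = some w ∨ (q ∈ (ks.foldl (pvInner v p) s).2 ∧ q ∉ s.2 ∧ w = v))) ∧
      (∀ x ∈ (ks.foldl (pvInner v p) s).2, (ks.foldl (pvInner v p) s).1.contains x = true) := by
  intro ks
  induction ks with
  | nil =>
    intro s hacc
    refine ⟨?_, hacc⟩
    intro q w
    simp only [List.foldl_nil]
    constructor
    · exact Or.inl
    · rintro (h | ⟨h1, h2, rfl⟩); exacts [h, absurd h1 h2]
  | cons k ks ih =>
    intro s hacc
    simp only [List.foldl_cons]
    by_cases hc : s.1.contains (prefix_reverse p k) = true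
    · rw [show pvInner v p s k = s from by simp [pvInner, hc]]
      exact ih s hacc
    · rw [show pvInner v p s k = (s.1.insert (prefix_reverse p k) v, s.2 ++ [prefix_reverse p k])
        from by simp [pvInner, hc]]
      have hcf : s.1.contains (prefix_reverse p k) = false := by simpa using hc
      have hacc' : ∀ x ∈ (s.1.insert (prefix_reverse p k) v, s.2 ++ [prefix_reverse p k]).2,
          (s.1.insert (prefix_reverse p k) v, s.2 ++ [prefix_reverse p k]).1.contains x = true := by
        intro x hx
        rcases List.mem_append.1 hx with hx | hx
        · show (s.1.insert (prefix_reverse p k) v).contains x = true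
          rw [PySem.Dict.contains_insert]
          simp [hacc x hx]
        · simp only [List.mem_singleton] at hx
          subst hx
          exact PySem.Dict.contains_insert_self _ _ _
      obtain ⟨hiff, hout⟩ := ih _ hacc'
      refine ⟨?_, hout⟩
      intro q w
      rw [hiff q w]
      have hq0none : s.1.get? (prefix_reverse p k) = none :=
        (PySem.Dict.get?_eq_none_iff_contains s.1 _).2 hcf
      have hq0nmem : prefix_reverse p k ∉ s.2 := fun hmem => by
        rw [hacc _ hmem] at hcf; exact Bool.noConfusion hcf
      have hsub : prefix_reverse p k ∈
          (ks.foldl (pvInner v p) (s.1.insert (prefix_reverse p k) v, s.2 ++ [prefix_reverse p k])).2 := by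
        rw [inner_ext]
        simp
      by_cases hqq : q = prefix_reverse p k
      · subst hqq
        show (s.1.insert (prefix_reverse p k) v).get? (prefix_reverse p k) = some w ∨ _ ↔ _
        rw [PySem.Dict.get?_insert_self]
        constructor
        · rintro (h | ⟨h1, h2, rfl⟩)
          · exact Or.inr ⟨hsub, hq0nmem, (Option.some.inj h).symm⟩
          · exact Or.inr ⟨hsub, hq0nmem, rfl⟩
        · rintro (h | ⟨h1, h2, rfl⟩)
          · rw [hq0none] at h; exact absurd h (by simp)
          · exact Or.inl rfl
      · show (s.1.insert (prefix_reverse p k) v).get? q = some w ∨ _ ↔ _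
        rw [PySem.Dict.get?_insert_of_ne _ _ hqq]
        have hmemiff : (q ∉ s.2 ++ [prefix_reverse p k]) ↔ q ∉ s.2 := by simp [hqq]
        rw [hmemiff]

theorem level_char (n v : Int) :
    ∀ (P : List (List Int)) (s : PySem.Dict (List Int) Int × List (List Int)),
    (∀ x ∈ s.2, s.1.contains x = true) →
    (∀ q w, (levelFold n v P s).1.get? q = some w ↔
        (s.1.get? q = some w ∨ (q ∈ (levelFold n v P s).2 ∧ q ∉ s.2 ∧ w = v))) ∧
      (∀ x ∈ (levelFold n v P s).2, (levelFold n v P s).1.contains x = true) := by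
  intro P
  induction P with
  | nil =>
    intro s hacc
    refine ⟨?_, hacc⟩
    intro q w
    simp only [levelFold, List.foldl_nil]
    constructor
    · exact Or.inl
    · rintro (h | ⟨h1, h2, rfl⟩); exacts [h, absurd h1 h2]
  | cons u P ih =>
    intro s hacc
    obtain ⟨hiff1, hout1⟩ := inner_char v u (PySem.List.pyRange 2 (n + 1) 1) s hacc
    obtain ⟨hiff2, hout2⟩ := ih ((PySem.List.pyRange 2 (n + 1) 1).foldl (pvInner v u) s) hout1
    have hconv : levelFold n v (u :: P) s =
        levelFold n v P ((PySem.List.pyRange 2 (n + 1) 1).foldl (pvInner v u) s) := rfl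
    rw [hconv]
    refine ⟨?_, hout2⟩
    intro q w
    rw [hiff2 q w, hiff1 q w]
    have he := inner_ext v u (PySem.List.pyRange 2 (n + 1) 1) s.1 s.2
    rw [Prod.mk.eta] at he
    have hle := level_ext n v P
      ((PySem.List.pyRange 2 (n + 1) 1).foldl (pvInner v u) s).1
      ((PySem.List.pyRange 2 (n + 1) 1).foldl (pvInner v u) s).2
    rw [Prod.mk.eta] at hle
    have hsub1 : q ∈ s.2 → q ∈ ((PySem.List.pyRange 2 (n + 1) 1).foldl (pvInner v u) s).2 := by
      intro hx; rw [he]; simp [hx]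
    have hsub2 : q ∈ ((PySem.List.pyRange 2 (n + 1) 1).foldl (pvInner v u) s).2 →
        q ∈ (levelFold n v P ((PySem.List.pyRange 2 (n + 1) 1).foldl (pvInner v u) s)).2 := by
      intro hx; rw [hle]; simp [hx]
    constructor
    · rintro ((h | ⟨h1, h2, hw⟩) | ⟨h1, h2, hw⟩)
      · exact Or.inl h
      · exact Or.inr ⟨hsub2 h1, h2, hw⟩
      · exact Or.inr ⟨h1, fun hx => h2 (hsub1 hx), hw⟩
    · rintro (h | ⟨h1, h2, hw⟩)
      · exact Or.inl (Or.inl h)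
      · by_cases hmid : q ∈ ((PySem.List.pyRange 2 (n + 1) 1).foldl (pvInner v u) s).2
        · exact Or.inl (Or.inr ⟨hmid, h2, hw⟩)
        · exact Or.inr ⟨h1, hmid, hw⟩

-- ---- the BFS history invariants ----

theorem inv_all (n : Int) (j : Nat) :
    DGood (identL n) (DF n j).1 ∧
      (∀ p ∈ (DF n j).2, (DF n j).1.get? p = some ((j : Nat) : Int)) ∧ HistP n j := by
  induction j with
  | zero =>
    refine ⟨init_good _, ?_, ?_⟩
    · intro p hp
      simp only [Nat.cast_zero]
      exact init_bind (identL n) p hp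
    · intro q w
      show (PySem.Dict.empty.insert (identL n) 0).get? q = some w ↔ _
      by_cases hq : q = identL n
      · subst hq
        rw [PySem.Dict.get?_insert_self]
        constructor
        · intro h
          exact ⟨0, le_refl _, by simpa using (Option.some.inj h), by show identL n ∈ [identL n]; simp⟩
        · rintro ⟨i, hi, hw, hmem⟩
          have hi0 : i = 0 := Nat.le_zero.mp hi
          subst hi0
          simp only [Nat.cast_zero] at hw
          rw [hw]
      · rw [PySem.Dict.get?_insert_of_ne _ _ hq, PySem.Dict.get?_empty]
        constructor
        · intro h; exact absurd h (by simp)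
        · rintro ⟨i, hi, hw, hmem⟩
          have hi0 : i = 0 := Nat.le_zero.mp hi
          subst hi0
          have : q ∈ [identL n] := hmem
          simp only [List.mem_singleton] at this
          exact absurd this hq
  | succ j ih =>
    obtain ⟨hg, hbind, hhist⟩ := ih
    obtain ⟨g2, a2, sz2⟩ := outer_inv (identL n) n ((j : Nat) : Int) (DF n j).2 ((DF n j).1, [])
      hbind hg (by intro x hx; exact absurd hx (List.not_mem_nil))
    have hDF : DF n (j + 1) = levelFold n (((j : Nat) : Int) + 1) (DF n j).2 ((DF n j).1, []) := rfl
    refine ⟨by rw [hDF]; exact g2, ?_, ?_⟩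
    · intro p hp
      rw [hDF] at hp ⊢
      have := a2 p hp
      rwa [show (((j + 1 : Nat)) : Int) = ((j : Nat) : Int) + 1 from by push_cast; ring]
    · intro q w
      have hchar := (level_char n (((j : Nat) : Int) + 1) (DF n j).2 ((DF n j).1, [])
        (by intro x hx; exact absurd hx (List.not_mem_nil))).1 q w
      rw [hDF, hchar]
      constructor
      · rintro (h | ⟨h1, _, hw⟩)
        · obtain ⟨i, hi, hw, hm⟩ := (hhist q w).1 h
          exact ⟨i, Nat.le_succ_of_le hi, hw, hm⟩
        · refine ⟨j + 1, le_refl _, by push_cast; omega, ?_⟩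
          show q ∈ (DF n (j + 1)).2
          rw [hDF]
          exact h1
      · rintro ⟨i, hi, hw, hm⟩
        rcases Nat.lt_or_ge i (j + 1) with hlt | hge
        · exact Or.inl ((hhist q w).2 ⟨i, Nat.lt_succ_iff.mp hlt, hw, hm⟩)
        · have hieq : i = j + 1 := le_antisymm hi hge
          subst hieq
          have hm' : q ∈ (levelFold n (((j : Nat) : Int) + 1) (DF n j).2 ((DF n j).1, [])).2 := by
            rw [← hDF]; exact hm
          exact Or.inr ⟨hm', List.not_mem_nil, by push_cast at hw ⊢; omega⟩

-- ---- leaf expansion: duplicates are no-ops ----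

theorem leaf_mono (v : Int) (p : List Int) :
    ∀ (ks : List Int) (d : PySem.Dict (List Int) Int) (x : List Int),
    d.contains x = true → (ks.foldl (leafStep v p) d).contains x = true := by
  intro ks
  induction ks with
  | nil => intro d x h; exact h
  | cons k ks ih =>
    intro d x h
    simp only [List.foldl_cons, leafStep]
    by_cases hc : d.contains (prefix_reverse p k) = true
    · rw [if_pos hc]; exact ih d x h
    · rw [if_neg hc]
      refine ih _ x ?_
      rw [PySem.Dict.contains_insert]
      simp [h]

theorem leaf_all (v : Int) (p : List Int) :
    ∀ (ks : List Int) (d : PySem.Dict (List Int) Int),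
    ∀ k ∈ ks, (ks.foldl (leafStep v p) d).contains (prefix_reverse p k) = true := by
  intro ks
  induction ks with
  | nil => intro d k hk; exact absurd hk (List.not_mem_nil)
  | cons k0 ks ih =>
    intro d k hk
    simp only [List.foldl_cons]
    rcases List.mem_cons.1 hk with rfl | hk
    · refine leaf_mono v p ks _ _ ?_
      show (leafStep v p d k).contains (prefix_reverse p k) = true
      simp only [leafStep]
      by_cases hc : d.contains (prefix_reverse p k) = true
      · rw [if_pos hc]; exact hc
      · rw [if_neg hc]; exact PySem.Dict.contains_insert_self _ _ _
    · exact ih _ k hk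

theorem leaf_done (v : Int) (p : List Int) :
    ∀ (ks : List Int) (d : PySem.Dict (List Int) Int),
    (∀ k ∈ ks, d.contains (prefix_reverse p k) = true) → ks.foldl (leafStep v p) d = d := by
  intro ks
  induction ks with
  | nil => intro d _; rfl
  | cons k ks ih =>
    intro d h
    simp only [List.foldl_cons, leafStep, if_pos (h k (by simp))]
    exact ih d (fun k' hk' => h k' (by simp [hk']))

theorem foldl_dfirst (n v : Int) :
    ∀ (V : List (List Int)) (d : PySem.Dict (List Int) Int) (seen : List (List Int)),
    (∀ u ∈ seen, ∀ k ∈ PySem.List.pyRange 2 (n + 1) 1, d.contains (prefix_reverse u k) = true) →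
    V.foldl (expandLeaf n v) d = (dfirstAux seen V).foldl (expandLeaf n v) d := by
  intro V
  induction V with
  | nil => intro d seen _; rfl
  | cons u V ih =>
    intro d seen hseen
    simp only [List.foldl_cons, dfirstAux]
    by_cases hu : u ∈ seen
    · rw [if_pos hu]
      rw [show expandLeaf n v d u = d from leaf_done v u _ d (hseen u hu)]
      exact ih d seen hseen
    · rw [if_neg hu]
      simp only [List.foldl_cons]
      refine ih (expandLeaf n v d u) (u :: seen) ?_
      intro w hw k hk
      rcases List.mem_cons.1 hw with rfl | hw
      · exact leaf_all v w _ d k hk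
      · exact leaf_mono v u _ d _ (hseen w hw k hk)

-- ---- walks: DFS leaf order dedups to the BFS level ----

theorem flatMap_congr_mem {α β : Type} (l : List α) (f g : α → List β)
    (h : ∀ x ∈ l, f x = g x) : l.flatMap f = l.flatMap g := by
  induction l with
  | nil => rfl
  | cons a l ih =>
    simp only [List.flatMap_cons]
    rw [h a (by simp), ih (fun x hx => h x (by simp [hx]))]

theorem mem_chN_contains (n : Int) (d : PySem.Dict (List Int) Int) (u x : List Int)
    (h : x ∈ chN n d u) : d.contains x = false := by
  obtain ⟨k, hk, hsome⟩ := List.mem_filterMap.1 h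
  by_cases hc : d.contains (prefix_reverse u k) = true
  · rw [if_pos hc] at hsome; exact absurd hsome (by simp)
  · rw [if_neg hc] at hsome
    have := Option.some.inj hsome
    subst this
    simpa using hc

theorem F_succ (n : Int) (j : Nat) :
    (DF n (j + 1)).2 = dfirstAux [] ((DF n j).2.flatMap (chN n (DF n j).1)) := by
  have h := (level_disc n (((j : Nat) : Int) + 1) (DF n j).1 (DF n j).2 ((DF n j).1, [])
    (by intro x; simp)).1
  simpa using h


theorem walk_bottom (n : Int) :
    ∀ (r depth : Nat) (u : List Int),
    walk n (r + 1) depth u = (walk n r depth u).flatMap (chF n (DF n (depth + r + 1)).2) := by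
  intro r
  induction r with
  | zero =>
    intro depth u
    show (chF n (DF n (depth + 1)).2 u).flatMap (walk n 0 (depth + 1)) = _
    show _ = [u].flatMap (chF n (DF n (depth + 0 + 1)).2)
    simp [walk]
  | succ r ih =>
    intro depth u
    show (chF n (DF n (depth + 1)).2 u).flatMap (walk n (r + 1) (depth + 1)) = _
    rw [flatMap_congr_mem _ _ _ (fun c _ => ih (depth + 1) c)]
    rw [← List.flatMap_assoc]
    have hidx : depth + 1 + r + 1 = depth + (r + 1) + 1 := by omega
    rw [hidx]
    rfl

theorem chF_eq_chN (n : Int) (j : Nat) (u : List Int) (hu : u ∈ (DF n j).2) :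
    chF n (DF n (j + 1)).2 u = chN n (DF n j).1 u := by
  have hF := F_succ n j
  show (PySem.List.pyRange 2 (n + 1) 1).filterMap _ = (PySem.List.pyRange 2 (n + 1) 1).filterMap _
  refine List.filterMap_congr ?_
  intro k hk
  by_cases hc : (DF n j).1.contains (prefix_reverse u k) = true
  · have hnm : prefix_reverse u k ∉ (DF n (j + 1)).2 := by
      rw [hF]
      intro hmem
      obtain ⟨hmf, _⟩ := (mem_dfirstAux _ _ _).1 hmem
      obtain ⟨u', _, hchn⟩ := List.mem_flatMap.1 hmf
      rw [mem_chN_contains n _ u' _ hchn] at hc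
      exact Bool.noConfusion hc
    rw [if_neg hnm, if_pos hc]
  · have hm : prefix_reverse u k ∈ (DF n (j + 1)).2 := by
      rw [hF]
      refine (mem_dfirstAux _ _ _).2 ⟨?_, List.not_mem_nil⟩
      refine List.mem_flatMap.2 ⟨u, hu, ?_⟩
      exact List.mem_filterMap.2 ⟨k, hk, by rw [if_neg hc]⟩
    rw [if_pos hm, if_neg hc]

theorem dfirst_walk (n : Int) :
    ∀ (j : Nat), dfirstAux [] (walk n j 0 (identL n)) = (DF n j).2 := by
  intro j
  induction j with
  | zero =>
    show dfirstAux [] [identL n] = [identL n]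
    simp [dfirstAux]
  | succ j ih =>
    have hwb := walk_bottom n j 0 (identL n)
    rw [Nat.zero_add] at hwb
    rw [hwb]
    rw [dfirst_flatMap (chF n (DF n (j + 1)).2) (walk n j 0 (identL n)) [] []
      (by intro u hu c hc; exact absurd hu (List.not_mem_nil))]
    rw [ih]
    rw [flatMap_congr_mem _ _ _ (fun u hu => chF_eq_chN n j u hu)]
    exact (F_succ n j).symm

-- ---- B's depth-limited DFS unrolls to leaf expansion over the walk list ----

-- ghost intermediate: the same depth-limited DFS WITHOUT the expanded set (it re-walks
-- every shortest-path prefix); B's pvDeepen is simulated against it below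
def pvWalkDeepen (n limit : Int) :
    Nat → Int → List Int → PySem.Dict (List Int) Int → PySem.Dict (List Int) Int
  | 0, _, _, dist => dist
  | r + 1, depth, perm, dist =>
    (PySem.List.pyRange 2 (n + 1) 1).foldl (fun dist k =>
      let q := prefix_reverse perm k
      if depth + 1 = limit then
        if dist.contains q then dist else dist.insert q limit
      else if dist.get? q = some (depth + 1) then
        pvWalkDeepen n limit r (depth + 1) q dist
      else dist) dist

theorem compat_insert (n : Int) (j : Nat) (s : PySem.Dict (List Int) Int) (q0 : List Int)
    (h : Compat n j s) (hfresh : s.contains q0 = false) :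
    Compat n j (s.insert q0 ((j : Int) + 1)) := by
  intro q i h1 h2
  by_cases hq : q = q0
  · subst hq
    rw [PySem.Dict.get?_insert_self]
    constructor
    · intro h
      have hinj := Option.some.inj h
      exfalso
      omega
    · intro hmem
      exfalso
      have hv := (h q i h1 h2).2 hmem
      rw [(PySem.Dict.get?_eq_none_iff_contains s q).2 hfresh] at hv
      exact absurd hv (by simp)
  · rw [PySem.Dict.get?_insert_of_ne _ _ hq]
    exact h q i h1 h2

theorem compat_expand (n : Int) (j : Nat) (p : List Int) :
    ∀ (ks : List Int) (s : PySem.Dict (List Int) Int),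
    Compat n j s → Compat n j (ks.foldl (leafStep ((j : Int) + 1) p) s) := by
  intro ks
  induction ks with
  | nil => intro s h; exact h
  | cons k ks ih =>
    intro s h
    simp only [List.foldl_cons, leafStep]
    by_cases hc : s.contains (prefix_reverse p k) = true
    · rw [if_pos hc]; exact ih s h
    · rw [if_neg hc]
      exact ih _ (compat_insert n j s _ h (by simpa using hc))

theorem deepen_unroll (n : Int) (j : Nat) :
    ∀ (r : Nat), ∀ (depth : Nat) (u : List Int) (s : PySem.Dict (List Int) Int),
    depth + r + 1 = j + 1 → Compat n j s →
    pvWalkDeepen n ((j : Int) + 1) (r + 1) ((depth : Nat) : Int) u s =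
        (walk n r depth u).foldl (expandLeaf n ((j : Int) + 1)) s ∧
      Compat n j (pvWalkDeepen n ((j : Int) + 1) (r + 1) ((depth : Nat) : Int) u s) := by
  intro r
  induction r with
  | zero =>
    intro depth u s hdj hcomp
    have hdepth : depth = j := by omega
    subst hdepth
    have hfn : (fun (dist : PySem.Dict (List Int) Int) (k : Int) =>
        if ((depth : Nat) : Int) + 1 = ((depth : Nat) : Int) + 1 then
          if dist.contains (prefix_reverse u k) then dist
          else dist.insert (prefix_reverse u k) (((depth : Nat) : Int) + 1)
        else if dist.get? (prefix_reverse u k) = some (((depth : Nat) : Int) + 1) then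
          pvWalkDeepen n (((depth : Nat) : Int) + 1) 0 (((depth : Nat) : Int) + 1)
            (prefix_reverse u k) dist
        else dist) = leafStep (((depth : Nat) : Int) + 1) u := by
      funext d k
      rw [if_pos rfl]
      rfl
    constructor
    · show (PySem.List.pyRange 2 (n + 1) 1).foldl (fun dist k =>
          if ((depth : Nat) : Int) + 1 = ((depth : Nat) : Int) + 1 then
            if dist.contains (prefix_reverse u k) then dist
            else dist.insert (prefix_reverse u k) (((depth : Nat) : Int) + 1)
          else if dist.get? (prefix_reverse u k) = some (((depth : Nat) : Int) + 1) then
            pvWalkDeepen n (((depth : Nat) : Int) + 1) 0 (((depth : Nat) : Int) + 1)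
              (prefix_reverse u k) dist
          else dist) s = _
      rw [hfn]
      rfl
    · show Compat n depth ((PySem.List.pyRange 2 (n + 1) 1).foldl (fun dist k =>
          if ((depth : Nat) : Int) + 1 = ((depth : Nat) : Int) + 1 then
            if dist.contains (prefix_reverse u k) then dist
            else dist.insert (prefix_reverse u k) (((depth : Nat) : Int) + 1)
          else if dist.get? (prefix_reverse u k) = some (((depth : Nat) : Int) + 1) then
            pvWalkDeepen n (((depth : Nat) : Int) + 1) 0 (((depth : Nat) : Int) + 1)
              (prefix_reverse u k) dist
          else dist) s)
      rw [hfn]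
      exact compat_expand n depth u _ s hcomp
  | succ r ih =>
    intro depth u s hdj hcomp
    have hne : ((depth : Nat) : Int) + 1 ≠ ((j : Nat) : Int) + 1 := by
      have : depth < j := by omega
      push_cast
      omega
    have haux : ∀ (ks : List Int) (d : PySem.Dict (List Int) Int), Compat n j d →
        (ks.foldl (fun dist k =>
            if ((depth : Nat) : Int) + 1 = ((j : Nat) : Int) + 1 then
              if dist.contains (prefix_reverse u k) then dist
              else dist.insert (prefix_reverse u k) (((j : Nat) : Int) + 1)
            else if dist.get? (prefix_reverse u k) = some (((depth : Nat) : Int) + 1) then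
              pvWalkDeepen n (((j : Nat) : Int) + 1) (r + 1) (((depth : Nat) : Int) + 1)
                (prefix_reverse u k) dist
            else dist) d =
          ((ks.filterMap (fun k => if prefix_reverse u k ∈ (DF n (depth + 1)).2
              then some (prefix_reverse u k) else none)).flatMap
            (walk n r (depth + 1))).foldl (expandLeaf n (((j : Nat) : Int) + 1)) d) ∧
        Compat n j (ks.foldl (fun dist k =>
            if ((depth : Nat) : Int) + 1 = ((j : Nat) : Int) + 1 then
              if dist.contains (prefix_reverse u k) then dist
              else dist.insert (prefix_reverse u k) (((j : Nat) : Int) + 1)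
            else if dist.get? (prefix_reverse u k) = some (((depth : Nat) : Int) + 1) then
              pvWalkDeepen n (((j : Nat) : Int) + 1) (r + 1) (((depth : Nat) : Int) + 1)
                (prefix_reverse u k) dist
            else dist) d) := by
      intro ks
      induction ks with
      | nil => intro d hc; exact ⟨rfl, hc⟩
      | cons k ks ihk =>
        intro d hc
        simp only [List.foldl_cons]
        rw [if_neg hne]
        have hcast : (((depth + 1 : Nat)) : Int) = ((depth : Nat) : Int) + 1 := by push_cast; ring
        by_cases hmem : prefix_reverse u k ∈ (DF n (depth + 1)).2
        · have hget : d.get? (prefix_reverse u k) = some (((depth : Nat) : Int) + 1) := by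
            have hi := (hc (prefix_reverse u k) (depth + 1) (by omega) (by omega)).2 hmem
            rwa [hcast] at hi
          rw [if_pos hget]
          obtain ⟨hrec, hcrec⟩ := ih (depth + 1) (prefix_reverse u k) d (by omega) hc
          rw [hcast] at hrec hcrec
          rw [hrec]
          have hfm : List.filterMap (fun k' => if prefix_reverse u k' ∈ (DF n (depth + 1)).2
                then some (prefix_reverse u k') else none) (k :: ks) =
              prefix_reverse u k :: List.filterMap (fun k' => if prefix_reverse u k' ∈ (DF n (depth + 1)).2
                then some (prefix_reverse u k') else none) ks := by
            simp [hmem]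
          rw [hfm]
          simp only [List.flatMap_cons]
          rw [List.foldl_append]
          rw [hrec] at hcrec
          exact ihk _ hcrec
        · have hget : ¬ d.get? (prefix_reverse u k) = some (((depth : Nat) : Int) + 1) := by
            intro h
            apply hmem
            refine (hc (prefix_reverse u k) (depth + 1) (by omega) (by omega)).1 ?_
            rwa [hcast]
          rw [if_neg hget]
          have hfm : List.filterMap (fun k' => if prefix_reverse u k' ∈ (DF n (depth + 1)).2
                then some (prefix_reverse u k') else none) (k :: ks) =
              List.filterMap (fun k' => if prefix_reverse u k' ∈ (DF n (depth + 1)).2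
                then some (prefix_reverse u k') else none) ks := by
            simp [hmem]
          rw [hfm]
          exact ihk d hc
    obtain ⟨h1, h2⟩ := haux (PySem.List.pyRange 2 (n + 1) 1) s hcomp
    exact ⟨h1, h2⟩

theorem altloop_succ (n : Int) (ident : List Int) (total : Int) (f : Nat) (limit : Int)
    (dist : PySem.Dict (List Int) Int) :
    pvAltLoop n ident total (f + 1) limit dist =
      if (dist.size : Int) < total then
        pvAltLoop n ident total f (limit + 1)
          (pvDeepen n limit limit.toNat 0 ident (dist, PySem.Set.empty)).1
      else dist := rfl

theorem pvRoundEq (n : Int) (j : Nat) :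
    pvWalkDeepen n ((j : Int) + 1) (j + 1) 0 (identL n) (DF n j).1 = (DF n (j + 1)).1 := by
  have hcomp : Compat n j (DF n j).1 := by
    intro q i h1 h2
    have hh := (inv_all n j).2.2
    constructor
    · intro h
      obtain ⟨i', hi', hw, hm⟩ := (hh q _).1 h
      have hii : i' = i := by exact_mod_cast hw
      subst hii
      exact hm
    · intro hm
      exact (hh q _).2 ⟨i, h2, rfl, hm⟩
  obtain ⟨h1, _⟩ := deepen_unroll n j j 0 (identL n) (DF n j).1 (by omega) hcomp
  rw [Nat.cast_zero] at h1
  rw [h1]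
  rw [foldl_dfirst n _ (walk n j 0 (identL n)) (DF n j).1 []
    (by intro u hu; exact absurd hu (List.not_mem_nil))]
  rw [dfirst_walk n j]
  exact (proj_level n (((j : Nat) : Int) + 1) (DF n j).2 ((DF n j).1, [])).symm

theorem size_step (n : Int) (j : Nat) :
    (DF n (j + 1)).1.size = (DF n j).1.size + (DF n (j + 1)).2.length := by
  obtain ⟨hg, hbind, _⟩ := inv_all n j
  obtain ⟨_, _, sz⟩ := outer_inv (identL n) n ((j : Nat) : Int) (DF n j).2 ((DF n j).1, [])
    hbind hg (by intro x hx; exact absurd hx (List.not_mem_nil))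
  simpa using sz

-- ---- the product loop computes the factorial ----

theorem prod_pyRange (m : Nat) :
    (PySem.List.pyRange 2 ((m : Int) + 1) 1).foldl (fun t i => t * i) (1 : Int) =
      (Nat.factorial m : Int) := by
  induction m with
  | zero =>
    rw [show ((0 : Nat) : Int) + 1 = 1 from by norm_num]
    rw [PySem.List.pyRange_one_eq_nil (by norm_num)]
    rfl
  | succ m ih =>
    rcases Nat.eq_zero_or_pos m with rfl | hm
    · rw [show ((1 : Nat) : Int) + 1 = 2 from by norm_num]
      rw [PySem.List.pyRange_one_eq_nil (by norm_num)]
      rfl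
    · have hsplit := PySem.List.pyRange_one_succ_right (a := 2) (b := ((m : Nat) : Int) + 1)
        (by exact_mod_cast Nat.succ_le_succ hm)
      rw [show (((m + 1 : Nat)) : Int) + 1 = (((m : Nat) : Int) + 1) + 1 from by push_cast; ring]
      rw [hsplit, List.foldl_append, ih]
      show (Nat.factorial m : Int) * (((m : Nat) : Int) + 1) = _
      rw [Nat.factorial_succ]
      push_cast
      ring

-- ---- full dict: once all n! permutations are found, a level adds nothing ----

def ExpDone (n : Int) (u : List Int) (d : PySem.Dict (List Int) Int) : Prop :=
  ∀ k ∈ PySem.List.pyRange 2 (n + 1) 1, d.contains (prefix_reverse u k) = true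

theorem foldl_expand_id (n v : Int) :
    ∀ (W : List (List Int)) (d : PySem.Dict (List Int) Int),
    (∀ u ∈ W, ExpDone n u d) → W.foldl (expandLeaf n v) d = d := by
  intro W
  induction W with
  | nil => intro d _; rfl
  | cons u W ih =>
    intro d h
    simp only [List.foldl_cons]
    rw [show expandLeaf n v d u = d from leaf_done v u _ d (h u (by simp))]
    exact ih d (fun w hw => h w (by simp [hw]))

theorem leaf_get_mono (v : Int) (p : List Int) :
    ∀ (ks : List Int) (d : PySem.Dict (List Int) Int) (q : List Int) (w : Int),
    d.get? q = some w → (ks.foldl (leafStep v p) d).get? q = some w := by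
  intro ks
  induction ks with
  | nil => intro d q w h; exact h
  | cons k ks ih =>
    intro d q w h
    simp only [List.foldl_cons, leafStep]
    by_cases hc : d.contains (prefix_reverse p k) = true
    · rw [if_pos hc]; exact ih d q w h
    · rw [if_neg hc]
      refine ih _ q w ?_
      have hnone : d.get? (prefix_reverse p k) = none :=
        (PySem.Dict.get?_eq_none_iff_contains d _).2 (by simpa using hc)
      have hne : q ≠ prefix_reverse p k := by
        intro he; rw [he, hnone] at h; exact absurd h (by simp)
      rw [PySem.Dict.get?_insert_of_ne _ _ hne]
      exact h

theorem contains_of_get_mono (d d' : PySem.Dict (List Int) Int)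
    (h : ∀ q w, d.get? q = some w → d'.get? q = some w) :
    ∀ x, d.contains x = true → d'.contains x = true := by
  intro x hx
  rw [PySem.Dict.contains_eq_isSome_get?] at hx ⊢
  cases hg : d.get? x with
  | none => rw [hg] at hx; exact Bool.noConfusion hx
  | some w => rw [h x w hg]; rfl

theorem expdone_mono (n : Int) (u : List Int) (d d' : PySem.Dict (List Int) Int)
    (h : ∀ x, d.contains x = true → d'.contains x = true) (hd : ExpDone n u d) :
    ExpDone n u d' := by
  intro k hk
  exact h _ (hd k hk)

theorem perm_complete (n : Int) (j : Nat)
    (hsz : (DF n j).1.size = Nat.factorial (identL n).length) :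
    ∀ q : List Int, q.Perm (identL n) → (DF n j).1.contains q = true := by
  obtain ⟨hnd, hperm⟩ := (inv_all n j).1
  have hsub : (DF n j).1.keys ⊆ (identL n).permutations := by
    intro q hq
    exact List.mem_permutations.2 (hperm q hq)
  have hsp : List.Subperm (DF n j).1.keys (identL n).permutations := hnd.subperm hsub
  have hklen : (DF n j).1.keys.length = (DF n j).1.size := by
    simp [PySem.Dict.keys, PySem.Dict.size]
  have hlen : (identL n).permutations.length ≤ (DF n j).1.keys.length := by
    rw [List.length_permutations, hklen, hsz]
  have hpm : (DF n j).1.keys.Perm (identL n).permutations := by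
    exact List.Subperm.perm_of_length_le hsp hlen
  intro q hq
  refine (PySem.Dict.contains_iff_mem_keys _ _).2 ?_
  rw [hpm.mem_iff]
  exact List.mem_permutations.2 hq

theorem full_dict (n : Int) (j : Nat)
    (hsz : (DF n j).1.size = Nat.factorial (identL n).length) :
    (DF n (j + 1)).1 = (DF n j).1 ∧ (DF n (j + 1)).2 = [] := by
  have hcomplete := perm_complete n j hsz
  have hg := (inv_all n j).1
  have hbind := (inv_all n j).2.1
  have hFperm : ∀ u ∈ (DF n j).2, u.Perm (identL n) := by
    intro u hu
    refine hg.2 u ?_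
    by_contra hn
    have := (PySem.Dict.get?_eq_none_iff_not_mem_keys (DF n j).1 u).2 hn
    rw [hbind u hu] at this
    exact absurd this (by simp)
  have hdone : ∀ u ∈ (DF n j).2, ExpDone n u (DF n j).1 := by
    intro u hu k hk
    exact hcomplete _ ((prefix_reverse_perm u k).trans (hFperm u hu))
  constructor
  · show (levelFold n (((j : Nat) : Int) + 1) (DF n j).2 ((DF n j).1, [])).1 = _
    rw [proj_level]
    exact foldl_expand_id n _ _ _ hdone
  · rw [F_succ]
    have hch : ∀ u ∈ (DF n j).2, chN n (DF n j).1 u = ([] : List (List Int)) := by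
      intro u hu
      refine List.filterMap_eq_nil_iff.2 ?_
      intro k hk
      rw [if_pos (hcomplete _ ((prefix_reverse_perm u k).trans (hFperm u hu)))]
    rw [flatMap_congr_mem _ _ (fun _ => ([] : List (List Int))) hch]
    rw [show (DF n j).2.flatMap (fun _ => ([] : List (List Int))) = [] from by simp]
    rfl

-- ---- the expanded set only skips subtrees whose effect is already in the dict ----

def InvX (n : Int) (j dlow : Nat) (ex : List (List Int)) (d : PySem.Dict (List Int) Int) : Prop :=
  ∀ q ∈ ex, ∃ (i r : Nat), i + r + 1 = j + 1 ∧ d.get? q = some ((i : Nat) : Int) ∧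
    (dlow ≤ i → ∀ w ∈ walk n r i q, ExpDone n w d)

theorem sim_ex (n : Int) (j : Nat) :
    ∀ (r : Nat), ∀ (depth : Nat) (u : List Int) (d : PySem.Dict (List Int) Int)
      (ex : List (List Int)),
    depth + r + 1 = j + 1 → Compat n j d → InvX n j (depth + 1) ex d →
    (pvDeepen n ((j : Int) + 1) (r + 1) ((depth : Nat) : Int) u (d, ex)).1 =
        pvWalkDeepen n ((j : Int) + 1) (r + 1) ((depth : Nat) : Int) u d ∧
      Compat n j (pvDeepen n ((j : Int) + 1) (r + 1) ((depth : Nat) : Int) u (d, ex)).1 ∧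
      InvX n j (depth + 1) (pvDeepen n ((j : Int) + 1) (r + 1) ((depth : Nat) : Int) u (d, ex)).2
        (pvDeepen n ((j : Int) + 1) (r + 1) ((depth : Nat) : Int) u (d, ex)).1 ∧
      (∀ q w, d.get? q = some w →
        (pvDeepen n ((j : Int) + 1) (r + 1) ((depth : Nat) : Int) u (d, ex)).1.get? q = some w) ∧
      (∀ q0 ∈ (pvDeepen n ((j : Int) + 1) (r + 1) ((depth : Nat) : Int) u (d, ex)).2,
        q0 ∈ ex ∨ ∃ (i : Nat), depth + 1 ≤ i ∧ i ≤ j ∧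
          (pvDeepen n ((j : Int) + 1) (r + 1) ((depth : Nat) : Int) u (d, ex)).1.get? q0 =
            some ((i : Nat) : Int)) ∧
      (∀ w ∈ walk n r depth u,
        ExpDone n w (pvDeepen n ((j : Int) + 1) (r + 1) ((depth : Nat) : Int) u (d, ex)).1) := by
  intro r
  induction r with
  | zero =>
    intro depth u d ex hdj hcomp hinv
    have hdepth : depth = j := by omega
    subst hdepth
    obtain ⟨hwd, _⟩ := deepen_unroll n depth 0 depth u d (by omega) hcomp
    have hval : pvDeepen n (((depth : Nat) : Int) + 1) (0 + 1) ((depth : Nat) : Int) u (d, ex) =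
        (expandLeaf n (((depth : Nat) : Int) + 1) d u, ex) := by
      simp only [pvDeepen]
      rw [if_true]
      rfl
    have hmono : ∀ q w, d.get? q = some w →
        (expandLeaf n (((depth : Nat) : Int) + 1) d u).get? q = some w :=
      fun q w h => leaf_get_mono _ u _ d q w h
    have hcmono : ∀ x, d.contains x = true →
        (expandLeaf n (((depth : Nat) : Int) + 1) d u).contains x = true :=
      fun x hx => leaf_mono _ u _ d x hx
    rw [hval]
    refine ⟨?_, ?_, ?_, ?_, ?_, ?_⟩
    · rw [hwd]; rfl
    · exact compat_expand n depth u _ d hcomp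
    · intro q hq
      obtain ⟨i, r', ha, hget, hdone⟩ := hinv q hq
      exact ⟨i, r', ha, hmono q _ hget,
        fun hdl w hw => expdone_mono n w d _ hcmono (hdone hdl w hw)⟩
    · exact hmono
    · intro q0 hq0; exact Or.inl hq0
    · intro w hw
      have hwu : w = u := by
        have : w ∈ [u] := hw
        simpa using this
      subst hwu
      intro k hk
      exact leaf_all _ w _ d k hk
  | succ r ih =>
    intro depth u d ex hdj hcomp hinv
    have hne : ((depth : Nat) : Int) + 1 ≠ ((j : Nat) : Int) + 1 := by
      have : depth < j := by omega
      push_cast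
      omega
    have hcast : (((depth + 1 : Nat)) : Int) = ((depth : Nat) : Int) + 1 := by push_cast; ring
    have hd1j : depth + 1 ≤ j := by omega
    -- the two inner fold bodies
    have haux : ∀ (ks : List Int) (s : PySem.Dict (List Int) Int × PySem.Set (List Int)),
        Compat n j s.1 → InvX n j (depth + 1) s.2 s.1 →
        ((ks.foldl (fun s k =>
            let q := prefix_reverse u k
            if s.1.get? q = some (((depth : Nat) : Int) + 1) ∧ q ∉ s.2 then
              pvDeepen n (((j : Nat) : Int) + 1) (r + 1) (((depth : Nat) : Int) + 1) q
                (s.1, PySem.Set.add s.2 q)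
            else s) s).1 =
          ks.foldl (fun dist k =>
            let q := prefix_reverse u k
            if ((depth : Nat) : Int) + 1 = ((j : Nat) : Int) + 1 then
              if dist.contains q then dist else dist.insert q (((j : Nat) : Int) + 1)
            else if dist.get? q = some (((depth : Nat) : Int) + 1) then
              pvWalkDeepen n (((j : Nat) : Int) + 1) (r + 1) (((depth : Nat) : Int) + 1) q dist
            else dist) s.1) ∧
        Compat n j (ks.foldl (fun s k =>
            let q := prefix_reverse u k
            if s.1.get? q = some (((depth : Nat) : Int) + 1) ∧ q ∉ s.2 then
              pvDeepen n (((j : Nat) : Int) + 1) (r + 1) (((depth : Nat) : Int) + 1) q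
                (s.1, PySem.Set.add s.2 q)
            else s) s).1 ∧
        InvX n j (depth + 1) (ks.foldl (fun s k =>
            let q := prefix_reverse u k
            if s.1.get? q = some (((depth : Nat) : Int) + 1) ∧ q ∉ s.2 then
              pvDeepen n (((j : Nat) : Int) + 1) (r + 1) (((depth : Nat) : Int) + 1) q
                (s.1, PySem.Set.add s.2 q)
            else s) s).2 (ks.foldl (fun s k =>
            let q := prefix_reverse u k
            if s.1.get? q = some (((depth : Nat) : Int) + 1) ∧ q ∉ s.2 then
              pvDeepen n (((j : Nat) : Int) + 1) (r + 1) (((depth : Nat) : Int) + 1) q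
                (s.1, PySem.Set.add s.2 q)
            else s) s).1 ∧
        (∀ q w, s.1.get? q = some w → (ks.foldl (fun s k =>
            let q := prefix_reverse u k
            if s.1.get? q = some (((depth : Nat) : Int) + 1) ∧ q ∉ s.2 then
              pvDeepen n (((j : Nat) : Int) + 1) (r + 1) (((depth : Nat) : Int) + 1) q
                (s.1, PySem.Set.add s.2 q)
            else s) s).1.get? q = some w) ∧
        (∀ q0 ∈ (ks.foldl (fun s k =>
            let q := prefix_reverse u k
            if s.1.get? q = some (((depth : Nat) : Int) + 1) ∧ q ∉ s.2 then
              pvDeepen n (((j : Nat) : Int) + 1) (r + 1) (((depth : Nat) : Int) + 1) q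
                (s.1, PySem.Set.add s.2 q)
            else s) s).2,
          q0 ∈ s.2 ∨ ∃ (i : Nat), depth + 1 ≤ i ∧ i ≤ j ∧ (ks.foldl (fun s k =>
            let q := prefix_reverse u k
            if s.1.get? q = some (((depth : Nat) : Int) + 1) ∧ q ∉ s.2 then
              pvDeepen n (((j : Nat) : Int) + 1) (r + 1) (((depth : Nat) : Int) + 1) q
                (s.1, PySem.Set.add s.2 q)
            else s) s).1.get? q0 = some ((i : Nat) : Int)) ∧
        (∀ k ∈ ks, prefix_reverse u k ∈ (DF n (depth + 1)).2 →
          ∀ w ∈ walk n r (depth + 1) (prefix_reverse u k), ExpDone n w (ks.foldl (fun s k =>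
            let q := prefix_reverse u k
            if s.1.get? q = some (((depth : Nat) : Int) + 1) ∧ q ∉ s.2 then
              pvDeepen n (((j : Nat) : Int) + 1) (r + 1) (((depth : Nat) : Int) + 1) q
                (s.1, PySem.Set.add s.2 q)
            else s) s).1) := by
      intro ks
      induction ks with
      | nil =>
        intro s hc hx
        exact ⟨rfl, hc, hx, fun q w h => h, fun q0 hq0 => Or.inl hq0,
          fun k hk => absurd hk (List.not_mem_nil)⟩
      | cons k ks ihk =>
        intro s hc hx
        simp only [List.foldl_cons]
        rw [if_neg hne]
        by_cases hcond : s.1.get? (prefix_reverse u k) = some (((depth : Nat) : Int) + 1) ∧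
            prefix_reverse u k ∉ s.2
        · -- fresh on-path child: both sides recurse
          rw [if_pos hcond, if_pos hcond.1]
          have hxadd : InvX n j (depth + 1 + 1) (PySem.Set.add s.2 (prefix_reverse u k)) s.1 := by
            intro q0 hq0
            rcases (PySem.Set.mem_add _ _ _).1 hq0 with hq0 | hq0
            · obtain ⟨i, r', ha, hget, hdone⟩ := hx q0 hq0
              exact ⟨i, r', ha, hget, fun hdl w hw => hdone (by omega) w hw⟩
            · subst hq0
              refine ⟨depth + 1, r, by omega, by rw [hcast]; exact hcond.1, ?_⟩
              intro hdl
              exact absurd hdl (by omega)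
          obtain ⟨ha1, ha2, ha3, ha4, ha5, ha6⟩ := ih (depth + 1) (prefix_reverse u k) s.1
            (PySem.Set.add s.2 (prefix_reverse u k)) (by omega) hc hxadd
          rw [hcast] at ha1 ha2 ha3 ha4 ha5 ha6
          -- re-establish the level-(depth+1) invariant for the child result
          have hcm := contains_of_get_mono _ _ ha4
          have hx' : InvX n j (depth + 1)
              (pvDeepen n (((j : Nat) : Int) + 1) (r + 1) (((depth : Nat) : Int) + 1)
                (prefix_reverse u k) (s.1, PySem.Set.add s.2 (prefix_reverse u k))).2
              (pvDeepen n (((j : Nat) : Int) + 1) (r + 1) (((depth : Nat) : Int) + 1)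
                (prefix_reverse u k) (s.1, PySem.Set.add s.2 (prefix_reverse u k))).1 := by
            intro q0 hq0
            rcases ha5 q0 hq0 with hq0' | ⟨i, hi1, hi2, hget⟩
            · rcases (PySem.Set.mem_add _ _ _).1 hq0' with hq0'' | hq0''
              · obtain ⟨i, r', ha, hget, hdone⟩ := hx q0 hq0''
                exact ⟨i, r', ha, ha4 q0 _ hget,
                  fun hdl w hw => expdone_mono n w _ _ hcm (hdone hdl w hw)⟩
              · subst hq0''
                refine ⟨depth + 1, r, by omega, ha4 _ _ (by rw [hcast]; exact hcond.1), ?_⟩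
                intro _
                exact ha6
            · obtain ⟨i', r', ha', hget', hdone'⟩ := ha3 q0 hq0
              have hii : i' = i := by
                have h12 := hget'.symm.trans hget
                exact_mod_cast Option.some.inj h12
              subst hii
              exact ⟨i', r', ha', hget', fun _ w hw => hdone' (by omega) w hw⟩
          obtain ⟨hb1, hb2, hb3, hb4, hb5, hb6⟩ := ihk _ ha2 hx'
          rw [ha1] at hb1
          refine ⟨hb1, hb2, hb3, ?_, ?_, ?_⟩
          · intro q w h
            exact hb4 q w (ha4 q w h)
          · intro q0 hq0
            rcases hb5 q0 hq0 with hq0' | ⟨i, hi1, hi2, hget⟩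
            · rcases ha5 q0 hq0' with hq0'' | ⟨i, hi1, hi2, hget⟩
              · rcases (PySem.Set.mem_add _ _ _).1 hq0'' with h3 | h3
                · exact Or.inl h3
                · subst h3
                  exact Or.inr ⟨depth + 1, le_refl _, hd1j,
                    hb4 _ _ (ha4 _ _ (by rw [hcast]; exact hcond.1))⟩
              · exact Or.inr ⟨i, by omega, hi2, hb4 _ _ hget⟩
            · exact Or.inr ⟨i, hi1, hi2, hget⟩
          · intro k' hk' hmem w hw
            rcases List.mem_cons.1 hk' with rfl | hk'
            · exact expdone_mono n w _ _ (contains_of_get_mono _ _ hb4) (ha6 w hw)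
            · exact hb6 k' hk' hmem w hw
        · -- child skipped by B; A's walk re-walks an already-done subtree (or skips too)
          rw [if_neg hcond]
          by_cases hget : s.1.get? (prefix_reverse u k) = some (((depth : Nat) : Int) + 1)
          · -- q ∈ expanded: the walk side re-walks, with no effect
            have hmem : prefix_reverse u k ∈ s.2 := by
              by_contra hn
              exact hcond ⟨hget, hn⟩
            rw [if_pos hget]
            obtain ⟨i, r', ha, hget0, hdone⟩ := hx _ hmem
            have hii : i = depth + 1 := by
              have h12 : ((i : Nat) : Int) = ((depth : Nat) : Int) + 1 := by
                have h13 := hget0.symm.trans hget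
                exact Option.some.inj h13
              omega
            subst hii
            have hrr : r' = r := by omega
            rw [hrr] at hdone
            have hdone' := hdone (le_refl _)
            obtain ⟨hwu, _⟩ := deepen_unroll n j r (depth + 1) (prefix_reverse u k) s.1
              (by omega) hc
            rw [hcast] at hwu
            rw [hwu, foldl_expand_id n _ _ _ hdone']
            obtain ⟨hb1, hb2, hb3, hb4, hb5, hb6⟩ := ihk s hc hx
            refine ⟨hb1, hb2, hb3, hb4, hb5, ?_⟩
            intro k' hk' hmemF w hw
            rcases List.mem_cons.1 hk' with rfl | hk'
            · exact expdone_mono n w _ _ (contains_of_get_mono _ _ hb4) (hdone' w hw)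
            · exact hb6 k' hk' hmemF w hw
          · rw [if_neg hget]
            obtain ⟨hb1, hb2, hb3, hb4, hb5, hb6⟩ := ihk s hc hx
            refine ⟨hb1, hb2, hb3, hb4, hb5, ?_⟩
            intro k' hk' hmem w hw
            rcases List.mem_cons.1 hk' with rfl | hk'
            · exfalso
              apply hget
              rw [← hcast]
              exact (hc (prefix_reverse u k') (depth + 1) (by omega) hd1j).2 hmem
            · exact hb6 k' hk' hmem w hw
    obtain ⟨h1, h2, h3, h4, h5, h6⟩ := haux (PySem.List.pyRange 2 (n + 1) 1) (d, ex) hcomp hinv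
    have hunfA : pvDeepen n (((j : Nat) : Int) + 1) (r + 1 + 1) ((depth : Nat) : Int) u (d, ex) =
        (PySem.List.pyRange 2 (n + 1) 1).foldl (fun s k =>
            let q := prefix_reverse u k
            if s.1.get? q = some (((depth : Nat) : Int) + 1) ∧ q ∉ s.2 then
              pvDeepen n (((j : Nat) : Int) + 1) (r + 1) (((depth : Nat) : Int) + 1) q
                (s.1, PySem.Set.add s.2 q)
            else s) (d, ex) := by
      simp only [pvDeepen]
      rw [if_neg hne]
    have hunfB : pvWalkDeepen n (((j : Nat) : Int) + 1) (r + 1 + 1) ((depth : Nat) : Int) u d =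
        (PySem.List.pyRange 2 (n + 1) 1).foldl (fun dist k =>
            let q := prefix_reverse u k
            if ((depth : Nat) : Int) + 1 = ((j : Nat) : Int) + 1 then
              if dist.contains q then dist else dist.insert q (((j : Nat) : Int) + 1)
            else if dist.get? q = some (((depth : Nat) : Int) + 1) then
              pvWalkDeepen n (((j : Nat) : Int) + 1) (r + 1) (((depth : Nat) : Int) + 1) q dist
            else dist) d := by
      simp only [pvWalkDeepen]
    rw [hunfA, hunfB]
    refine ⟨h1, h2, h3, h4, h5, ?_⟩
    intro w hw
    obtain ⟨c, hc1, hc2⟩ := List.mem_flatMap.1 hw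
    obtain ⟨k, hk, hk2⟩ := List.mem_filterMap.1 hc1
    by_cases hmemF : prefix_reverse u k ∈ (DF n (depth + 1)).2
    · rw [if_pos hmemF] at hk2
      have hc3 : c = prefix_reverse u k := (Option.some.inj hk2).symm
      subst hc3
      exact h6 k hk hmemF w hc2
    · rw [if_neg hmemF] at hk2
      exact absurd hk2 (by simp)

theorem round_ex (n : Int) (j : Nat) :
    (pvDeepen n ((j : Int) + 1) (j + 1) 0 (identL n) ((DF n j).1, PySem.Set.empty)).1 =
      (DF n (j + 1)).1 := by
  have hcomp : Compat n j (DF n j).1 := by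
    intro q i h1 h2
    have hh := (inv_all n j).2.2
    constructor
    · intro h
      obtain ⟨i', hi', hw, hm⟩ := (hh q _).1 h
      have hii : i' = i := by exact_mod_cast hw
      subst hii
      exact hm
    · intro hm
      exact (hh q _).2 ⟨i, h2, rfl, hm⟩
  obtain ⟨h1, _, _, _, _, _⟩ := sim_ex n j j 0 (identL n) (DF n j).1 PySem.Set.empty
    (by omega) hcomp (by intro q hq; exact absurd hq (List.not_mem_nil))
  rw [Nat.cast_zero] at h1
  rw [h1]
  exact pvRoundEq n j

theorem empty_rounds (n : Int) :
    ∀ (f : Nat) (j : Nat), (DF n j).2 = [] →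
    pvAltLoop n (identL n) ((Nat.factorial (identL n).length : Nat) : Int) f
        (((j : Nat) : Int) + 1) (DF n j).1 = (DF n j).1 := by
  intro f
  induction f with
  | zero => intro j h; rfl
  | succ f ihf =>
    intro j h
    rw [altloop_succ]
    have ht : ((((j : Nat) : Int)) + 1).toNat = j + 1 := by omega
    by_cases hlt : (((DF n j).1.size : Nat) : Int) < ((Nat.factorial (identL n).length : Nat) : Int)
    · rw [if_pos hlt, ht, round_ex n j]
      have hF1 : (DF n (j + 1)).2 = [] := by
        rw [F_succ, h]
        rfl
      have hD1 : (DF n (j + 1)).1 = (DF n j).1 := by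
        show (levelFold n (((j : Nat) : Int) + 1) (DF n j).2 ((DF n j).1, [])).1 = _
        rw [h]
        rfl
      rw [hD1]
      have happ := ihf (j + 1) hF1
      rw [hD1] at happ
      rw [show ((j : Nat) : Int) + 1 + 1 = (((j + 1 : Nat)) : Int) + 1 from by push_cast; ring]
      exact happ
    · rw [if_neg hlt]

-- ---- the two loops agree round by round ----

theorem main_sim (n : Int) :
    ∀ (fb : Nat) (fa : Nat) (j : Nat),
    (DF n j).2.length + (Nat.factorial (identL n).length - (DF n j).1.size) ≤ fa →
    (Nat.factorial (identL n).length - (DF n j).1.size) + 1 ≤ fb →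
    levelLoop n fa (DF n j).1 (DF n j).2 ((j : Nat) : Int) =
      pvAltLoop n (identL n) ((Nat.factorial (identL n).length : Nat) : Int) fb
        (((j : Nat) : Int) + 1) (DF n j).1 := by
  intro fb
  induction fb with
  | zero =>
    intro fa j hfa hfb
    exact absurd hfb (by omega)
  | succ fb ih =>
    intro fa j hfa hfb
    have ht : ((((j : Nat) : Int)) + 1).toNat = j + 1 := by omega
    obtain ⟨hg1, _, _⟩ := inv_all n j
    have hszle : (DF n j).1.size ≤ Nat.factorial (identL n).length := size_le_bound _ _ hg1
    by_cases hlt : (((DF n j).1.size : Nat) : Int) < ((Nat.factorial (identL n).length : Nat) : Int)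
    · cases hF : (DF n j).2 with
      | nil =>
        rw [loopB_nil]
        exact (empty_rounds n (fb + 1) j hF).symm
      | cons q qs =>
        cases fa with
        | zero =>
          exfalso
          rw [hF] at hfa
          simp only [List.length_cons] at hfa
          omega
        | succ fa =>
          rw [loopB_cons]
          have hDF1 : (DF n (j + 1)).1 =
              (levelFold n (((j : Nat) : Int) + 1) (q :: qs) ((DF n j).1, [])).1 := by
            show (levelFold n (((j : Nat) : Int) + 1) (DF n j).2 ((DF n j).1, [])).1 = _
            rw [hF]
          have hDF2 : (DF n (j + 1)).2 =
              (levelFold n (((j : Nat) : Int) + 1) (q :: qs) ((DF n j).1, [])).2 := by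
            show (levelFold n (((j : Nat) : Int) + 1) (DF n j).2 ((DF n j).1, [])).2 = _
            rw [hF]
          rw [← hDF1, ← hDF2]
          rw [altloop_succ, if_pos hlt, ht, round_ex n j]
          have hsz := size_step n j
          obtain ⟨hg2, _, _⟩ := inv_all n (j + 1)
          have hbound := size_le_bound (identL n) (DF n (j + 1)).1 hg2
          by_cases hF1 : (DF n (j + 1)).2 = []
          · rw [hF1, loopB_nil]
            rw [show ((j : Nat) : Int) + 1 + 1 = (((j + 1 : Nat)) : Int) + 1 from by push_cast; ring]
            exact (empty_rounds n fb (j + 1) hF1).symm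
          · have hlen : 0 < (DF n (j + 1)).2.length := List.length_pos_iff.2 hF1
            have hfa' : (DF n (j + 1)).2.length +
                (Nat.factorial (identL n).length - (DF n (j + 1)).1.size) ≤ fa := by
              rw [hF] at hfa
              simp only [List.length_cons] at hfa
              omega
            have hfb' : (Nat.factorial (identL n).length - (DF n (j + 1)).1.size) + 1 ≤ fb := by
              omega
            have happ := ih fa (j + 1) hfa' hfb'
            rw [show ((j : Nat) : Int) + 1 = (((j + 1 : Nat)) : Int) from by push_cast; ring]
            exact happ
    · have hszeq : (DF n j).1.size = Nat.factorial (identL n).length := by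
        have hnl : ¬ ((DF n j).1.size < Nat.factorial (identL n).length) := by
          intro hc
          apply hlt
          exact_mod_cast hc
        omega
      rw [altloop_succ, if_neg hlt]
      cases hF : (DF n j).2 with
      | nil => rw [loopB_nil]
      | cons q qs =>
        cases fa with
        | zero =>
          exfalso
          rw [hF] at hfa
          simp only [List.length_cons] at hfa
          omega
        | succ fa =>
          rw [loopB_cons]
          obtain ⟨hfd1, hfd2⟩ := full_dict n j hszeq
          have hDF1 : (DF n (j + 1)).1 =
              (levelFold n (((j : Nat) : Int) + 1) (q :: qs) ((DF n j).1, [])).1 := by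
            show (levelFold n (((j : Nat) : Int) + 1) (DF n j).2 ((DF n j).1, [])).1 = _
            rw [hF]
          have hDF2 : (DF n (j + 1)).2 =
              (levelFold n (((j : Nat) : Int) + 1) (q :: qs) ((DF n j).1, [])).2 := by
            show (levelFold n (((j : Nat) : Int) + 1) (DF n j).2 ((DF n j).1, [])).2 = _
            rw [hF]
          rw [← hDF1, ← hDF2, hfd2, loopB_nil, hfd1]

-- ===== VERDICT (by name: the statement is the Claim_ definition above) =====
theorem pancake_bfs_spec : Claim_equal_pancake_bfs := by
  intro n _
  show (pancake_bfs_loop n (Nat.factorial n.toNat)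
      (PySem.Dict.empty.insert (PySem.List.pyRange 1 (n + 1) 1) 0)
      [PySem.List.pyRange 1 (n + 1) 1]).items =
    (pvAltLoop n (PySem.List.pyRange 1 (n + 1) 1)
      ((PySem.List.pyRange 2 (((PySem.List.pyRange 1 (n + 1) 1).length : Int) + 1) 1).foldl
        (fun t i => t * i) (1 : Int))
      (Nat.factorial n.toNat + 1) 1
      (PySem.Dict.empty.insert (PySem.List.pyRange 1 (n + 1) 1) 0)).items
  refine congrArg PySem.Dict.items ?_
  rw [sim n (PySem.List.pyRange 1 (n + 1) 1) (Nat.factorial n.toNat) (Nat.factorial n.toNat)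
    (PySem.Dict.empty.insert (PySem.List.pyRange 1 (n + 1) 1) 0) [PySem.List.pyRange 1 (n + 1) 1] 0
    (init_bind _) (init_good _) (init_fuel n) (init_fuel n)]
  have hlen : (PySem.List.pyRange 1 (n + 1) 1).length = n.toNat := by
    rw [PySem.List.length_pyRange_one]
    omega
  have hfact : Nat.factorial (identL n).length = Nat.factorial n.toNat := by
    show Nat.factorial (PySem.List.pyRange 1 (n + 1) 1).length = _
    rw [hlen]
  rw [hlen, prod_pyRange n.toNat]
  have hsz0 : (DF n 0).1.size = 1 := by
    show (PySem.Dict.empty.insert (identL n) 0).size = 1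
    rw [PySem.Dict.size_insert, PySem.Dict.contains_empty]
    simp [PySem.Dict.size_empty]
  have hpos := Nat.factorial_pos n.toNat
  have hM := main_sim n (Nat.factorial n.toNat + 1) (Nat.factorial n.toNat) 0
    (by
      show (DF n 0).2.length + _ ≤ _
      have hl1 : (DF n 0).2.length = 1 := rfl
      rw [hl1, hsz0, hfact]
      omega)
    (by rw [hsz0, hfact]; omega)
  rw [hfact] at hM
  simp only [Nat.cast_zero, zero_add] at hM
  exact hM
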